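-- pv_equiv track=rewrite | github.com/54k/leetcode-rs | cpp/foxford/38/D.py | bfs
-- ===== SOURCE A (Python) =====
-- from collections import deque
--
-- DX = [1, 0, -1, 0]
--
-- DY = [0, 1, 0, -1]
--
-- def bfs(maze, start, end, n, m):
--     # Очередь для BFS
--     queue = deque()
--     visited = set()
--
--     # Добавляем в очередь начальные позиции для всех 4 направлений
--     for direction in range(4):
--         queue.append((start[0], start[1], direction, 0))
--         visited.add((start[0], start[1], direction))
--
--     while queue:
--         x, y, direction, distance = queue.popleft()
--
--         if (x, y) == end:
--             return distance
--
--         # Движение прямо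
--         nx, ny = x + DX[direction], y + DY[direction]
--         if 0 <= nx < n and 0 <= ny < m and maze[nx][ny] != 'X':
--             if (nx, ny, direction) not in visited:
--                 queue.append((nx, ny, direction, distance + 1))
--                 visited.add((nx, ny, direction))
--
--         # Правый поворот
--         new_direction = (direction + 1) % 4
--         if (x, y, new_direction) not in visited:
--             queue.append((x, y, new_direction, distance + 1))
--             visited.add((x, y, new_direction))
--
--     return -1  # На случай, если выход не найден
-- ===== SOURCE B (Python) =====
-- DX = [1, 0, -1, 0]
--
-- DY = [0, 1, 0, -1]
--
-- def bfs(maze, start, end, n, m):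
--     # Bellman-Ford style dynamic programming over (x, y, direction) states:
--     # repeatedly relax a distance table to its fixpoint (no queue, no visited
--     # set), then read off the smallest distance among the four directions at
--     # the end cell.
--     dist = {}
--     for d in range(4):
--         dist[(start[0], start[1], d)] = 0
--     for _ in range(4 * n * m + 4):
--         changed = False
--         for (x, y, d), v in list(dist.items()):
--             nx, ny = x + DX[d], y + DY[d]
--             if 0 <= nx < n and 0 <= ny < m and maze[nx][ny] != 'X':
--                 t = (nx, ny, d)
--                 if t not in dist or dist[t] > v + 1:
--                     dist[t] = v + 1
--                     changed = True
--             t = (x, y, (d + 1) % 4)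
--             if t not in dist or dist[t] > v + 1:
--                 dist[t] = v + 1
--                 changed = True
--         if not changed:
--             break
--     best = -1
--     for d in range(4):
--         key = (end[0], end[1], d)
--         if key in dist and (best == -1 or dist[key] < best):
--             best = dist[key]
--     return best
-- ===== Notes on version B (the rewrite author's own statement) =====
-- stated objective: alternative
-- what changed: Replaces A's BFS (FIFO queue over (x,y,direction) states with a visited set) by Bellman-Ford style dynamic programming: a distance table keyed by state is repeatedly relaxed to its fixpoint with no queue and no visited set, and the answer is read off as the minimum table value among the four directions at the end cell.
-- outside the precondition, e.g. on bfs([], (0, 4), (0, 4), 1, 5): A returns 0, B raises IndexError; on bfs([['X', 'X'], ['X']], (0, 0), (1, 1), 2, 2): A returns -1, B returns -1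
import Mathlib
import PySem

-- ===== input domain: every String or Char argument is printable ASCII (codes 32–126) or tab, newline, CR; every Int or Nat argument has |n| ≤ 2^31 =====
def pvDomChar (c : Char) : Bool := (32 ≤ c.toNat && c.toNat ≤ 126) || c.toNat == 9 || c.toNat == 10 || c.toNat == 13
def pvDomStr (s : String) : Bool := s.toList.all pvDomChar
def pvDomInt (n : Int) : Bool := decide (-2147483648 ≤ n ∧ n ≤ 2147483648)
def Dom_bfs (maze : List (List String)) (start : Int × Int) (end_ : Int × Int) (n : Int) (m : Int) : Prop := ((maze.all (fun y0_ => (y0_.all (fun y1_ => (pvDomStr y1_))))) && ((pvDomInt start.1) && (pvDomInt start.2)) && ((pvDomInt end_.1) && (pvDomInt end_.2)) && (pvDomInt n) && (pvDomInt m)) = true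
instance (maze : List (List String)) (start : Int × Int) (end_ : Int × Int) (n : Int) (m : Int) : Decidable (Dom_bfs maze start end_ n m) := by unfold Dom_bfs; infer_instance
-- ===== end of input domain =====

-- B replaces A's BFS (FIFO queue + visited set) by Bellman-Ford style dynamic programming:
-- a distance table over (x, y, direction) states is relaxed to its fixpoint and the best
-- distance among the four directions at the end cell is read off; equal return value.

-- Module-level constants DX / DY shared by both Python versions
def pvDX : List Int := [1, 0, -1, 0]
def pvDY : List Int := [0, 1, 0, -1]

-- ===== PORT A =====
-- A's while-loop as fuel recursion (fuel provably sufficient under Pre_, see pvAdqA below;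
-- on exhaustion the loop yields none, mapped to -1 — unreachable inside Pre_).
def bfsLoopA (maze : List (List String)) (end_ : Int × Int) (n : Int) (m : Int) :
    Nat → List (Int × Int × Int × Int) → PySem.Set (Int × Int × Int) → Option Int
  | 0, _, _ => none
  | _ + 1, [], _ => some (-1)
  | fuel + 1, (x, y, dir, dist) :: rest, visited =>
    if (x, y) = end_ then some dist
    else
      -- straight move: nx, ny = x + DX[direction], y + DY[direction]
      let nx := x + PySem.List.pyGetD pvDX dir 0
      let ny := y + PySem.List.pyGetD pvDY dir 0
      -- maze[nx][ny] via pyGetD: in range whenever the bound checks pass and Pre_ holds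
      let qv1 :=
        if 0 ≤ nx ∧ nx < n ∧ 0 ≤ ny ∧ ny < m ∧
            PySem.List.pyGetD (PySem.List.pyGetD maze nx []) ny "" ≠ "X" then
          if PySem.Set.contains visited (nx, ny, dir) then (rest, visited)
          else (rest ++ [(nx, ny, dir, dist + 1)], PySem.Set.add visited (nx, ny, dir))
        else (rest, visited)
      -- right turn
      let nd := PySem.Int.mod (dir + 1) 4
      let qv2 :=
        if PySem.Set.contains qv1.2 (x, y, nd) then qv1
        else (qv1.1 ++ [(x, y, nd, dist + 1)], PySem.Set.add qv1.2 (x, y, nd))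
      bfsLoopA maze end_ n m fuel qv2.1 qv2.2

def bfs (maze : List (List String)) (start : Int × Int) (end_ : Int × Int) (n : Int) (m : Int) : Int :=
  -- for direction in range(4): queue.append(...); visited.add(...)
  let init := (PySem.List.pyRange 0 4 1).foldl
    (fun (qv : List (Int × Int × Int × Int) × PySem.Set (Int × Int × Int)) d =>
      (qv.1 ++ [(start.1, start.2, d, (0 : Int))], PySem.Set.add qv.2 (start.1, start.2, d)))
    ([], PySem.Set.empty)
  match bfsLoopA maze end_ n m (8 * ((maze.length + 1) * (m.toNat + 1) + 1) + 9) init.1 init.2 with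
  | some r => r
  | none => -1

-- ===== PORT B =====
-- `if t not in dist or dist[t] > w: dist[t] = w; changed = True` of Source B
def pvRelaxKey (dc : PySem.Dict (Int × Int × Int) Int × Bool) (t : Int × Int × Int) (w : Int) :
    PySem.Dict (Int × Int × Int) Int × Bool :=
  match dc.1.get? t with
  | none => (dc.1.insert t w, true)
  | some u => if w < u then (dc.1.insert t w, true) else dc

-- body of Source B's `for (x, y, d), v in list(dist.items())` loop
def bfsRelax (maze : List (List String)) (n m : Int)
    (acc : PySem.Dict (Int × Int × Int) Int × Bool) (it : (Int × Int × Int) × Int) :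
    PySem.Dict (Int × Int × Int) Int × Bool :=
  let x := it.1.1; let y := it.1.2.1; let d := it.1.2.2; let v := it.2
  let nx := x + PySem.List.pyGetD pvDX d 0
  let ny := y + PySem.List.pyGetD pvDY d 0
  let acc1 :=
    if 0 ≤ nx ∧ nx < n ∧ 0 ≤ ny ∧ ny < m ∧
        PySem.List.pyGetD (PySem.List.pyGetD maze nx []) ny "" ≠ "X" then
      pvRelaxKey acc (nx, ny, d) (v + 1)
    else acc
  pvRelaxKey acc1 (x, y, PySem.Int.mod (d + 1) 4) (v + 1)

-- one round: the for-loop over the snapshot list(dist.items()), with the `changed` flag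
def bfsRound (maze : List (List String)) (n m : Int) (dist : PySem.Dict (Int × Int × Int) Int) :
    PySem.Dict (Int × Int × Int) Int × Bool :=
  dist.items.foldl (bfsRelax maze n m) (dist, false)

-- Source B's `for _ in range(4*n*m+4)` loop with the `if not changed: break`
def bfsBFLoop (maze : List (List String)) (n m : Int) :
    Nat → PySem.Dict (Int × Int × Int) Int → PySem.Dict (Int × Int × Int) Int
  | 0, dist => dist
  | r + 1, dist =>
    let p := bfsRound maze n m dist
    if p.2 then bfsBFLoop maze n m r p.1 else p.1

def bfsBestStep (T : PySem.Dict (Int × Int × Int) Int) (e : Int × Int) (best d : Int) : Int :=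
  match T.get? (e.1, e.2, d) with
  | some v => if best = -1 ∨ v < best then v else best
  | none => best

-- Source B's final `for d in range(4)` best-of-four extraction
def bfsBest (T : PySem.Dict (Int × Int × Int) Int) (e : Int × Int) : Int :=
  (PySem.List.pyRange 0 4 1).foldl (bfsBestStep T e) (-1)

def bfs_alt (maze : List (List String)) (start : Int × Int) (end_ : Int × Int) (n : Int) (m : Int) : Int :=
  let init := (PySem.List.pyRange 0 4 1).foldl
    (fun (dd : PySem.Dict (Int × Int × Int) Int) d => dd.insert (start.1, start.2, d) 0)
    PySem.Dict.empty
  bfsBest (bfsBFLoop maze n m (4 * n * m + 4).toNat init) end_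

-- ===== PRECONDITION & SPEC =====
-- Pre_ admits the inputs on which neither program ever indexes outside the maze: an empty
-- declared grid (n ≤ 0 or m ≤ 0), a maze that really has the declared n×m shape, or a start
-- none of whose four neighbours is in the declared grid (the search never leaves start).
-- Outside Pre_ the maze misses cells the programs may touch: A raises IndexError on the first
-- reached missing cell but can also return first (B then raises, exploring exhaustively) —
-- see claim.json "cites".
def Pre_bfs (maze : List (List String)) (start : Int × Int) (end_ : Int × Int) (n : Int) (m : Int) : Prop :=
  n ≤ 0 ∨ m ≤ 0 ∨
  (n ≤ (maze.length : Int) ∧ ∀ row ∈ maze.take n.toNat, m ≤ (row.length : Int)) ∨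
  (¬(0 ≤ start.1 + 1 ∧ start.1 + 1 < n ∧ 0 ≤ start.2 ∧ start.2 < m) ∧
   ¬(0 ≤ start.1 ∧ start.1 < n ∧ 0 ≤ start.2 + 1 ∧ start.2 + 1 < m) ∧
   ¬(0 ≤ start.1 - 1 ∧ start.1 - 1 < n ∧ 0 ≤ start.2 ∧ start.2 < m) ∧
   ¬(0 ≤ start.1 ∧ start.1 < n ∧ 0 ≤ start.2 - 1 ∧ start.2 - 1 < m))
instance (maze : List (List String)) (start : Int × Int) (end_ : Int × Int) (n : Int) (m : Int) : Decidable (Pre_bfs maze start end_ n m) := by unfold Pre_bfs; infer_instance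

def pvWitness_bfs : List (List String) × (Int × Int) × (Int × Int) × Int × Int :=
  ([[".", "."], [".", "."]], (0, 0), (1, 1), 2, 2)

def Spec_bfs (maze : List (List String)) (start : Int × Int) (end_ : Int × Int) (n : Int) (m : Int) (out : Int) : Prop := out = bfs_alt maze start end_ n m
instance (maze : List (List String)) (start : Int × Int) (end_ : Int × Int) (n : Int) (m : Int) (out : Int) : Decidable (Spec_bfs maze start end_ n m out) := by unfold Spec_bfs; infer_instance

-- ===== CLAIM (what is proved, stated in full; the proofs are below) =====
def Claim_equal_bfs : Prop := ∀ (maze : List (List String)) (start : Int × Int) (end_ : Int × Int) (n : Int) (m : Int), Dom_bfs maze start end_ n m → Pre_bfs maze start end_ n m → Spec_bfs maze start end_ n m (bfs maze start end_ n m)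

-- ===== LEMMAS AND PROOFS =====

-- ---------- proof-side model of the breadth-first generations ----------

-- frontier elements tagged with their distance, as they sit in A's queue
def pvTag (d : Int) (l : List (Int × Int × Int)) : List (Int × Int × Int × Int) :=
  l.map (fun s => (s.1, s.2.1, s.2.2, d))

-- one state expansion of the generation-synchronous reading of A's BFS
def bfsStepB (maze : List (List String)) (n : Int) (m : Int)
    (acc : List (Int × Int × Int) × PySem.Set (Int × Int × Int)) (s : Int × Int × Int) :
    List (Int × Int × Int) × PySem.Set (Int × Int × Int) :=
  let nx := s.1 + PySem.List.pyGetD pvDX s.2.2 0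
  let ny := s.2.1 + PySem.List.pyGetD pvDY s.2.2 0
  let acc1 :=
    if 0 ≤ nx ∧ nx < n ∧ 0 ≤ ny ∧ ny < m ∧
        PySem.List.pyGetD (PySem.List.pyGetD maze nx []) ny "" ≠ "X" ∧
        ¬ PySem.Set.contains acc.2 (nx, ny, s.2.2) then
      (acc.1 ++ [(nx, ny, s.2.2)], PySem.Set.add acc.2 (nx, ny, s.2.2))
    else acc
  let r := (s.1, s.2.1, PySem.Int.mod (s.2.2 + 1) 4)
  if PySem.Set.contains acc1.2 r then acc1
  else (acc1.1 ++ [r], PySem.Set.add acc1.2 r)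

-- the generation-synchronous loop (fuel as for A; none = exhaustion)
def bfsLoopB (maze : List (List String)) (end_ : Int × Int) (n : Int) (m : Int) :
    Nat → List (Int × Int × Int) → PySem.Set (Int × Int × Int) → Int → Option Int
  | 0, _, _, _ => none
  | _ + 1, [], _, _ => some (-1)
  | fuel + 1, frontier, seen, dist =>
    if frontier.any (fun s => (s.1, s.2.1) == end_) then some dist
    else
      let p := frontier.foldl (bfsStepB maze n m) ([], seen)
      bfsLoopB maze end_ n m fuel p.1 p.2 (dist + 1)

-- the four seed states
def pvF0 (start : Int × Int) : List (Int × Int × Int) :=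
  [(start.1, start.2, 0), (start.1, start.2, 1), (start.1, start.2, 2), (start.1, start.2, 3)]

-- generation k: (frontier of layer k, states seen in layers ≤ k)
def pvGen (maze : List (List String)) (start : Int × Int) (n m : Int) :
    Nat → List (Int × Int × Int) × PySem.Set (Int × Int × Int)
  | 0 => (pvF0 start, PySem.Set.ofList (pvF0 start))
  | k + 1 =>
    (pvGen maze start n m k).1.foldl (bfsStepB maze n m) ([], (pvGen maze start n m k).2)

-- the (at most two) states one step away from s: straight if open, plus the right turn
def pvCands (maze : List (List String)) (n m : Int) (s : Int × Int × Int) :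
    List (Int × Int × Int) :=
  (if 0 ≤ s.1 + PySem.List.pyGetD pvDX s.2.2 0 ∧ s.1 + PySem.List.pyGetD pvDX s.2.2 0 < n ∧
      0 ≤ s.2.1 + PySem.List.pyGetD pvDY s.2.2 0 ∧ s.2.1 + PySem.List.pyGetD pvDY s.2.2 0 < m ∧
      PySem.List.pyGetD (PySem.List.pyGetD maze (s.1 + PySem.List.pyGetD pvDX s.2.2 0) [])
        (s.2.1 + PySem.List.pyGetD pvDY s.2.2 0) "" ≠ "X" then
    [(s.1 + PySem.List.pyGetD pvDX s.2.2 0, s.2.1 + PySem.List.pyGetD pvDY s.2.2 0, s.2.2)]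
  else []) ++ [(s.1, s.2.1, PySem.Int.mod (s.2.2 + 1) 4)]

-- ---------- old A-side machinery: termination measures ----------

-- the finite state space: in-grid states plus the four start states
noncomputable def pvSpace (start : Int × Int) (n m : Int) : Finset (Int × Int × Int) :=
  (Finset.Icc 0 (n - 1) ×ˢ Finset.Icc 0 (m - 1) ×ˢ ({0, 1, 2, 3} : Finset Int)) ∪
  ({start.1} ×ˢ {start.2} ×ˢ ({0, 1, 2, 3} : Finset Int))

-- a state either search may ever hold: position in grid or at start, direction in [0,4)
def pvOkSt (start : Int × Int) (n m : Int) (s : Int × Int × Int) : Prop :=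
  ((0 ≤ s.1 ∧ s.1 < n ∧ 0 ≤ s.2.1 ∧ s.2.1 < m) ∨ (s.1, s.2.1) = start) ∧ 0 ≤ s.2.2 ∧ s.2.2 < 4

noncomputable def pvPhi (S : Finset (Int × Int × Int)) (q : List (Int × Int × Int × Int))
    (seen : PySem.Set (Int × Int × Int)) : ℕ :=
  2 * (S \ seen.toFinset).card + q.length + 1

noncomputable def pvPsi (S : Finset (Int × Int × Int)) (seen : PySem.Set (Int × Int × Int)) : ℕ :=
  (S \ seen.toFinset).card + 2

lemma pvOkSt_mem_space {start : Int × Int} {n m : Int} {s : Int × Int × Int}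
    (h : pvOkSt start n m s) : s ∈ pvSpace start n m := by
  obtain ⟨hp, hd0, hd4⟩ := h
  obtain ⟨x, y, d⟩ := s
  simp only [pvSpace, Finset.mem_union, Finset.mem_product, Finset.mem_Icc,
    Finset.mem_insert, Finset.mem_singleton] at *
  rcases hp with h | h
  · exact Or.inl ⟨⟨h.1, by omega⟩, ⟨h.2.2.1, by omega⟩, by omega⟩
  · exact Or.inr ⟨by simpa using congrArg Prod.fst h, by simpa using congrArg Prod.snd h, by omega⟩

lemma pvSpace_card_le (start : Int × Int) (n m : Int) :
    (pvSpace start n m).card ≤ n.toNat * (m.toNat * 4) + 4 := by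
  refine le_trans (Finset.card_union_le _ _) ?_
  have h1 : ((Finset.Icc (0:Int) (n - 1)) ×ˢ (Finset.Icc (0:Int) (m - 1)) ×ˢ ({0, 1, 2, 3} : Finset Int)).card = n.toNat * (m.toNat * 4) := by
    simp [Int.card_Icc]
  have h2 : (({start.1} : Finset Int) ×ˢ ({start.2} : Finset Int) ×ˢ ({0, 1, 2, 3} : Finset Int)).card = 4 := by
    simp [Finset.card_product]
  omega

lemma pvNd_ok (d : Int) : 0 ≤ PySem.Int.mod (d + 1) 4 ∧ PySem.Int.mod (d + 1) 4 < 4 :=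
  ⟨PySem.Int.mod_nonneg _ (by norm_num), PySem.Int.mod_lt _ (by norm_num)⟩

-- adding a fresh in-space element shrinks the unexplored part by exactly one
lemma pvCard_add {S : Finset (Int × Int × Int)} {s : PySem.Set (Int × Int × Int)}
    {e : Int × Int × Int} (he : e ∈ S) (hn : e ∉ s) :
    (S \ (PySem.Set.add s e).toFinset).card + 1 = (S \ s.toFinset).card := by
  have ht : (PySem.Set.add s e).toFinset = insert e s.toFinset := by
    rw [PySem.Set.add_of_not_mem hn]; simp [List.toFinset_append]
  rw [ht, Finset.sdiff_insert,
    Finset.card_erase_of_mem (by simp [Finset.mem_sdiff, he, hn])]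
  have hmem : e ∈ S \ s.toFinset := by simp [Finset.mem_sdiff, he, hn]
  have h1 : 1 ≤ (S \ s.toFinset).card := Finset.card_pos.2 ⟨e, hmem⟩
  omega

-- pushing a fresh admissible state costs one unit of Φ
lemma pvPush (S : Finset (Int × Int × Int)) (q : List (Int × Int × Int × Int))
    (seen : PySem.Set (Int × Int × Int)) (cx cy cd : Int) (dd : Int)
    (hc : (cx, cy, cd) ∈ S) (hn : (cx, cy, cd) ∉ seen) :
    pvPhi S (q ++ [(cx, cy, cd, dd)]) (PySem.Set.add seen (cx, cy, cd)) + 1 =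
      pvPhi S q seen := by
  have h := pvCard_add (S := S) hc hn
  simp only [pvPhi, List.length_append, List.length_cons, List.length_nil]
  omega

-- one pop of A's loop IS one bfsStepB, with the discoveries appended to the (d+1)-generation
lemma pvStepAB (maze : List (List String)) (end_ : Int × Int) (n m : Int) (fuel : Nat)
    (x y dir : Int) (t l2 : List (Int × Int × Int))
    (seen : PySem.Set (Int × Int × Int)) (d : Int) :
    bfsLoopA maze end_ n m (fuel + 1) (pvTag d ((x, y, dir) :: t) ++ pvTag (d + 1) l2) seen =
      if (x, y) = end_ then some d
      else
        bfsLoopA maze end_ n m fuel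
          (pvTag d t ++ pvTag (d + 1) (bfsStepB maze n m (l2, seen) (x, y, dir)).1)
          (bfsStepB maze n m (l2, seen) (x, y, dir)).2 := by
  have hq : pvTag d ((x, y, dir) :: t) ++ pvTag (d + 1) l2 =
      (x, y, dir, d) :: (pvTag d t ++ pvTag (d + 1) l2) := by simp [pvTag]
  rw [hq]
  by_cases hend : (x, y) = end_
  · simp [bfsLoopA, hend]
  · simp only [bfsLoopA, if_neg hend, bfsStepB]
    split_ifs <;> first
      | tauto
      | (simp [pvTag, List.append_assoc] at * <;> tauto)

-- A consumes one level exactly as the generation fold expands it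
lemma pvProcessLevel (maze : List (List String)) (end_ : Int × Int) (n m : Int) :
    ∀ (l1 : List (Int × Int × Int)) (fuel : Nat) (l2 : List (Int × Int × Int))
      (seen : PySem.Set (Int × Int × Int)) (d : Int) (r : Int),
    bfsLoopA maze end_ n m fuel (pvTag d l1 ++ pvTag (d + 1) l2) seen = some r →
    (if l1.any (fun s => (s.1, s.2.1) == end_) then r = d
     else ∃ f', f' + l1.length = fuel ∧
       bfsLoopA maze end_ n m f'
         (pvTag (d + 1) (l1.foldl (bfsStepB maze n m) (l2, seen)).1)
         (l1.foldl (bfsStepB maze n m) (l2, seen)).2 = some r) := by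
  intro l1
  induction l1 with
  | nil =>
    intro fuel l2 seen d r h
    simp only [List.any_nil, if_neg Bool.false_ne_true, List.foldl_nil]
    exact ⟨fuel, by simp, by simpa [pvTag] using h⟩
  | cons s t ih =>
    intro fuel l2 seen d r h
    obtain ⟨x, y, dir⟩ := s
    cases fuel with
    | zero => simp [bfsLoopA] at h
    | succ fuel =>
      rw [pvStepAB] at h
      by_cases hend : (x, y) = end_
      · rw [if_pos hend] at h
        have : r = d := by simpa using h.symm
        simp [hend, this]
      · rw [if_neg hend] at h
        have ih' := ih fuel (bfsStepB maze n m (l2, seen) (x, y, dir)).1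
          (bfsStepB maze n m (l2, seen) (x, y, dir)).2 d r (by simpa using h)
        have hbeq : (((x, y, dir).1, (x, y, dir).2.1) == end_) = false := by
          simpa using hend
        simp only [List.any_cons, hbeq, Bool.false_or, List.foldl_cons, List.length_cons]
        rcases Decidable.em (t.any (fun s => (s.1, s.2.1) == end_) = true) with ha | ha
        · rw [if_pos ha]; rw [if_pos ha] at ih'; exact ih'
        · rw [if_neg ha]; rw [if_neg ha] at ih'
          obtain ⟨f', hf, hrun⟩ := ih'
          exact ⟨f', by omega, hrun⟩

-- whenever both loops return, they return the same distance
lemma pvMainAB (maze : List (List String)) (end_ : Int × Int) (n m : Int) :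
    ∀ (fuelA : Nat) (frontier : List (Int × Int × Int))
      (seen : PySem.Set (Int × Int × Int)) (d : Int) (fuelB : Nat) (r r' : Int),
    bfsLoopA maze end_ n m fuelA (pvTag d frontier) seen = some r →
    bfsLoopB maze end_ n m fuelB frontier seen d = some r' → r = r' := by
  intro fuelA
  induction fuelA using Nat.strong_induction_on with
  | _ fuelA ih =>
    intro frontier seen d fuelB r r' hA hB
    cases fuelB with
    | zero => simp [bfsLoopB] at hB
    | succ fuelB =>
      cases frontier with
      | nil =>
        cases fuelA with
        | zero => simp [bfsLoopA] at hA
        | succ fuelA =>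
          have hr : r = -1 := by simpa [pvTag, bfsLoopA] using hA.symm
          have hr' : r' = -1 := by simpa [bfsLoopB] using hB.symm
          rw [hr, hr']
      | cons s t =>
        have hP := pvProcessLevel maze end_ n m (s :: t) fuelA [] seen d r
          (by simpa [pvTag] using hA)
        by_cases hany : ((s :: t).any (fun s => (s.1, s.2.1) == end_)) = true
        · rw [if_pos hany] at hP
          have hr' : r' = d := by
            simp only [bfsLoopB, if_pos hany] at hB
            exact (Option.some.injEq _ _).mp hB |>.symm
          rw [hP, hr']
        · rw [if_neg hany] at hP
          obtain ⟨f', hf, hrun⟩ := hP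
          have hB' : bfsLoopB maze end_ n m fuelB
              ((s :: t).foldl (bfsStepB maze n m) ([], seen)).1
              ((s :: t).foldl (bfsStepB maze n m) ([], seen)).2 (d + 1) = some r' := by
            simp only [bfsLoopB] at hB
            rw [if_neg (by simpa using hany)] at hB
            simpa using hB
          exact ih f' (by simp at hf; omega) _ _ _ _ _ _ hrun hB'

-- A's fuel is sufficient: Φ decreases at every pop
lemma pvAdqA (maze : List (List String)) (end_ : Int × Int) (n m : Int)
    (S : Finset (Int × Int × Int)) (Ok : (Int × Int × Int) → Prop)
    (hOkS : ∀ s, Ok s → s ∈ S)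
    (hstr : ∀ x y d, Ok (x, y, d) →
      (0 ≤ x + PySem.List.pyGetD pvDX d 0 ∧ x + PySem.List.pyGetD pvDX d 0 < n ∧
       0 ≤ y + PySem.List.pyGetD pvDY d 0 ∧ y + PySem.List.pyGetD pvDY d 0 < m) →
      Ok (x + PySem.List.pyGetD pvDX d 0, y + PySem.List.pyGetD pvDY d 0, d))
    (htrn : ∀ x y d, Ok (x, y, d) → Ok (x, y, PySem.Int.mod (d + 1) 4)) :
    ∀ (fuel : Nat) (q : List (Int × Int × Int × Int)) (seen : PySem.Set (Int × Int × Int)),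
    (∀ e ∈ q, Ok (e.1, e.2.1, e.2.2.1)) →
    pvPhi S q seen ≤ fuel → (bfsLoopA maze end_ n m fuel q seen).isSome := by
  intro fuel
  induction fuel with
  | zero => intro q seen _ hφ; simp [pvPhi] at hφ
  | succ fuel ih =>
    intro q seen hq hφ
    cases q with
    | nil => simp [bfsLoopA]
    | cons e rest =>
      obtain ⟨x, y, dir, dist⟩ := e
      have hhead : Ok (x, y, dir) := hq _ (List.mem_cons_self ..)
      have hrest : ∀ e ∈ rest, Ok (e.1, e.2.1, e.2.2.1) :=
        fun e he => hq e (List.mem_cons_of_mem _ he)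
      simp only [bfsLoopA]
      by_cases hend : (x, y) = end_
      · simp [hend]
      · rw [if_neg hend]
        set nx := x + PySem.List.pyGetD pvDX dir 0 with hnxd
        set ny := y + PySem.List.pyGetD pvDY dir 0 with hnyd
        set nd := PySem.Int.mod (dir + 1) 4 with hndd
        have hphir : pvPhi S rest seen + 1 = pvPhi S ((x, y, dir, dist) :: rest) seen := by
          simp [pvPhi]; omega
        by_cases hc : 0 ≤ nx ∧ nx < n ∧ 0 ≤ ny ∧ ny < m ∧
            PySem.List.pyGetD (PySem.List.pyGetD maze nx []) ny "" ≠ "X"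
        · by_cases h1 : PySem.Set.contains seen (nx, ny, dir) = true
          · simp only [if_pos hc, if_pos h1]
            by_cases h2 : PySem.Set.contains seen (x, y, nd) = true
            · simp only [if_pos h2]
              exact ih rest seen hrest (by omega)
            · simp only [if_neg h2]
              have hok : Ok (x, y, nd) := htrn x y dir hhead
              have := pvPush S rest seen x y nd (dist + 1) (hOkS _ hok)
                (fun hm => h2 ((PySem.Set.contains_iff _ _).2 hm))
              refine ih _ _ ?_ (by omega)
              intro e he
              rcases List.mem_append.1 he with he | he
              · exact hrest e he
              · simp only [List.mem_singleton] at he; subst he; exact hok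
          · simp only [if_pos hc, if_neg h1]
            have hok1 : Ok (nx, ny, dir) :=
              hstr x y dir hhead ⟨hc.1, hc.2.1, hc.2.2.1, hc.2.2.2.1⟩
            have hp1 := pvPush S rest seen nx ny dir (dist + 1) (hOkS _ hok1)
              (fun hm => h1 ((PySem.Set.contains_iff _ _).2 hm))
            by_cases h2 : PySem.Set.contains (PySem.Set.add seen (nx, ny, dir)) (x, y, nd) = true
            · simp only [if_pos h2]
              refine ih _ _ ?_ (by omega)
              intro e he
              rcases List.mem_append.1 he with he | he
              · exact hrest e he
              · simp only [List.mem_singleton] at he; subst he; exact hok1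
            · simp only [if_neg h2]
              have hok2 : Ok (x, y, nd) := htrn x y dir hhead
              have hp2 := pvPush S (rest ++ [(nx, ny, dir, dist + 1)])
                (PySem.Set.add seen (nx, ny, dir)) x y nd (dist + 1) (hOkS _ hok2)
                (fun hm => h2 ((PySem.Set.contains_iff _ _).2 hm))
              refine ih _ _ ?_ (by omega)
              intro e he
              rcases List.mem_append.1 he with he | he
              · rcases List.mem_append.1 he with he | he
                · exact hrest e he
                · simp only [List.mem_singleton] at he; subst he; exact hok1
              · simp only [List.mem_singleton] at he; subst he; exact hok2
        · simp only [if_neg hc]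
          by_cases h2 : PySem.Set.contains seen (x, y, nd) = true
          · simp only [if_pos h2]
            exact ih rest seen hrest (by omega)
          · simp only [if_neg h2]
            have hok : Ok (x, y, nd) := htrn x y dir hhead
            have := pvPush S rest seen x y nd (dist + 1) (hOkS _ hok)
              (fun hm => h2 ((PySem.Set.contains_iff _ _).2 hm))
            refine ih _ _ ?_ (by omega)
            intro e he
            rcases List.mem_append.1 he with he | he
            · exact hrest e he
            · simp only [List.mem_singleton] at he; subst he; exact hok

-- one bfsStepB conserves unexplored+discovered and admissibility
lemma pvStepB_spec (maze : List (List String)) (n m : Int)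
    (S : Finset (Int × Int × Int)) (Ok : (Int × Int × Int) → Prop)
    (hOkS : ∀ s, Ok s → s ∈ S)
    (hstr : ∀ x y d, Ok (x, y, d) →
      (0 ≤ x + PySem.List.pyGetD pvDX d 0 ∧ x + PySem.List.pyGetD pvDX d 0 < n ∧
       0 ≤ y + PySem.List.pyGetD pvDY d 0 ∧ y + PySem.List.pyGetD pvDY d 0 < m) →
      Ok (x + PySem.List.pyGetD pvDX d 0, y + PySem.List.pyGetD pvDY d 0, d))
    (htrn : ∀ x y d, Ok (x, y, d) → Ok (x, y, PySem.Int.mod (d + 1) 4))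
    (acc : List (Int × Int × Int) × PySem.Set (Int × Int × Int))
    (s : Int × Int × Int) (hs : Ok s) :
    ((S \ (bfsStepB maze n m acc s).2.toFinset).card
        + (bfsStepB maze n m acc s).1.length ≤
      (S \ acc.2.toFinset).card + acc.1.length)
    ∧ (∀ e ∈ (bfsStepB maze n m acc s).1, e ∈ acc.1 ∨ Ok e) := by
  obtain ⟨x, y, d⟩ := s
  simp only [bfsStepB]
  set nx := (x, y, d).1 + PySem.List.pyGetD pvDX (x, y, d).2.2 0 with hnxd
  set ny := (x, y, d).2.1 + PySem.List.pyGetD pvDY (x, y, d).2.2 0 with hnyd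
  set nd := PySem.Int.mod ((x, y, d).2.2 + 1) 4 with hndd
  have hokr : Ok (x, y, nd) := htrn x y d hs
  by_cases hc : 0 ≤ nx ∧ nx < n ∧ 0 ≤ ny ∧ ny < m ∧
      PySem.List.pyGetD (PySem.List.pyGetD maze nx []) ny "" ≠ "X" ∧
      ¬ PySem.Set.contains acc.2 (nx, ny, (x, y, d).2.2) = true
  · simp only [if_pos hc]
    have hok1 : Ok (nx, ny, d) :=
      hstr x y d hs ⟨hc.1, hc.2.1, hc.2.2.1, hc.2.2.2.1⟩
    have hn1 : (nx, ny, d) ∉ acc.2 := fun hm => hc.2.2.2.2.2 ((PySem.Set.contains_iff _ _).2 hm)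
    have hcard1 := pvCard_add (S := S) (hOkS _ hok1) hn1
    by_cases h2 : PySem.Set.contains (PySem.Set.add acc.2 (nx, ny, d)) (x, y, nd) = true
    · simp only [if_pos h2]
      constructor
      · simp only [List.length_append, List.length_cons, List.length_nil]; omega
      · intro e he
        rcases List.mem_append.1 he with he | he
        · exact Or.inl he
        · simp only [List.mem_singleton] at he; subst he; exact Or.inr hok1
    · simp only [if_neg h2]
      have hn2 : (x, y, nd) ∉ PySem.Set.add acc.2 (nx, ny, d) :=
        fun hm => h2 ((PySem.Set.contains_iff _ _).2 hm)
      have hcard2 := pvCard_add (S := S) (hOkS _ hokr) hn2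
      constructor
      · simp only [List.length_append, List.length_cons, List.length_nil]; omega
      · intro e he
        rcases List.mem_append.1 he with he | he
        · rcases List.mem_append.1 he with he | he
          · exact Or.inl he
          · simp only [List.mem_singleton] at he; subst he; exact Or.inr hok1
        · simp only [List.mem_singleton] at he; subst he; exact Or.inr hokr
  · simp only [if_neg hc]
    by_cases h2 : PySem.Set.contains acc.2 (x, y, nd) = true
    · simp only [if_pos h2]
      exact ⟨le_refl _, fun e he => Or.inl he⟩
    · simp only [if_neg h2]
      have hn2 : (x, y, nd) ∉ acc.2 := fun hm => h2 ((PySem.Set.contains_iff _ _).2 hm)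
      have hcard2 := pvCard_add (S := S) (hOkS _ hokr) hn2
      constructor
      · simp only [List.length_append, List.length_cons, List.length_nil]; omega
      · intro e he
        rcases List.mem_append.1 he with he | he
        · exact Or.inl he
        · simp only [List.mem_singleton] at he; subst he; exact Or.inr hokr

-- the generation fold: unexplored+discovered is conserved, states stay admissible
lemma pvFoldB (maze : List (List String)) (n m : Int)
    (S : Finset (Int × Int × Int)) (Ok : (Int × Int × Int) → Prop)
    (hOkS : ∀ s, Ok s → s ∈ S)
    (hstr : ∀ x y d, Ok (x, y, d) →
      (0 ≤ x + PySem.List.pyGetD pvDX d 0 ∧ x + PySem.List.pyGetD pvDX d 0 < n ∧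
       0 ≤ y + PySem.List.pyGetD pvDY d 0 ∧ y + PySem.List.pyGetD pvDY d 0 < m) →
      Ok (x + PySem.List.pyGetD pvDX d 0, y + PySem.List.pyGetD pvDY d 0, d))
    (htrn : ∀ x y d, Ok (x, y, d) → Ok (x, y, PySem.Int.mod (d + 1) 4)) :
    ∀ (l : List (Int × Int × Int)) (acc : List (Int × Int × Int) × PySem.Set (Int × Int × Int)),
    (∀ s ∈ l, Ok s) →
    ((S \ (l.foldl (bfsStepB maze n m) acc).2.toFinset).card
        + (l.foldl (bfsStepB maze n m) acc).1.length ≤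
      (S \ acc.2.toFinset).card + acc.1.length)
    ∧ (∀ s ∈ (l.foldl (bfsStepB maze n m) acc).1, s ∈ acc.1 ∨ Ok s) := by
  intro l
  induction l with
  | nil => intro acc _; exact ⟨le_refl _, fun s hs => Or.inl hs⟩
  | cons s t ih =>
    intro acc hl
    have hs : Ok s := hl s (List.mem_cons_self ..)
    have hstep := pvStepB_spec maze n m S Ok hOkS hstr htrn acc s hs
    have hih := ih (bfsStepB maze n m acc s) (fun e he => hl e (List.mem_cons_of_mem _ he))
    simp only [List.foldl_cons]
    refine ⟨le_trans hih.1 hstep.1, fun e he => ?_⟩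
    rcases hih.2 e he with he' | he'
    · exact hstep.2 e he'
    · exact Or.inr he'

-- the generation loop's fuel is sufficient
lemma pvAdqB (maze : List (List String)) (end_ : Int × Int) (n m : Int)
    (S : Finset (Int × Int × Int)) (Ok : (Int × Int × Int) → Prop)
    (hOkS : ∀ s, Ok s → s ∈ S)
    (hstr : ∀ x y d, Ok (x, y, d) →
      (0 ≤ x + PySem.List.pyGetD pvDX d 0 ∧ x + PySem.List.pyGetD pvDX d 0 < n ∧
       0 ≤ y + PySem.List.pyGetD pvDY d 0 ∧ y + PySem.List.pyGetD pvDY d 0 < m) →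
      Ok (x + PySem.List.pyGetD pvDX d 0, y + PySem.List.pyGetD pvDY d 0, d))
    (htrn : ∀ x y d, Ok (x, y, d) → Ok (x, y, PySem.Int.mod (d + 1) 4)) :
    ∀ (fuel : Nat) (frontier : List (Int × Int × Int))
      (seen : PySem.Set (Int × Int × Int)) (dist : Int),
    (∀ s ∈ frontier, Ok s) →
    pvPsi S seen ≤ fuel → (bfsLoopB maze end_ n m fuel frontier seen dist).isSome := by
  intro fuel
  induction fuel with
  | zero => intro frontier seen dist _ hψ; simp [pvPsi] at hψ
  | succ fuel ih =>
    intro frontier seen dist hf hψ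
    cases frontier with
    | nil => simp [bfsLoopB]
    | cons s t =>
      simp only [bfsLoopB]
      by_cases hany : ((s :: t).any (fun s => (s.1, s.2.1) == end_)) = true
      · rw [if_pos hany]; simp
      · rw [if_neg hany]
        have hfold := pvFoldB maze n m S Ok hOkS hstr htrn (s :: t) ([], seen) hf
        have hinv : ∀ e ∈ ((s :: t).foldl (bfsStepB maze n m) ([], seen)).1,
            Ok e := by
          intro e he
          rcases hfold.2 e he with he' | he'
          · simp at he'
          · exact he'
        cases hp : ((s :: t).foldl (bfsStepB maze n m) ([], seen)).1 with
        | nil =>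
          cases fuel with
          | zero => simp [pvPsi] at hψ
          | succ fuel => simp [bfsLoopB]
        | cons a b =>
          refine ih _ _ _ (hp ▸ hinv) ?_
          have := hfold.1
          rw [hp] at this
          simp only [List.length_nil, List.length_cons, add_zero] at this
          simp only [pvPsi] at hψ ⊢
          omega

-- closure of the admissible-state predicate on the full space
lemma pvOk_str (start : Int × Int) (n m : Int) : ∀ x y d : Int, pvOkSt start n m (x, y, d) →
    (0 ≤ x + PySem.List.pyGetD pvDX d 0 ∧ x + PySem.List.pyGetD pvDX d 0 < n ∧
     0 ≤ y + PySem.List.pyGetD pvDY d 0 ∧ y + PySem.List.pyGetD pvDY d 0 < m) →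
    pvOkSt start n m (x + PySem.List.pyGetD pvDX d 0, y + PySem.List.pyGetD pvDY d 0, d) :=
  fun _ _ _ h hb => ⟨Or.inl ⟨hb.1, hb.2.1, hb.2.2.1, hb.2.2.2⟩, h.2⟩

lemma pvOk_trn (start : Int × Int) (n m : Int) : ∀ x y d : Int, pvOkSt start n m (x, y, d) →
    pvOkSt start n m (x, y, PySem.Int.mod (d + 1) 4) :=
  fun _ _ d h => ⟨h.1, pvNd_ok d⟩

-- ---------- single-step facts about bfsStepB ----------

lemma pvStep_mem1 {maze : List (List String)} {n m : Int}
    {acc : List (Int × Int × Int) × PySem.Set (Int × Int × Int)} {s x : Int × Int × Int}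
    (h : x ∈ acc.1) : x ∈ (bfsStepB maze n m acc s).1 := by
  simp only [bfsStepB]
  split_ifs <;> simp_all

lemma pvStep_mem2 {maze : List (List String)} {n m : Int}
    {acc : List (Int × Int × Int) × PySem.Set (Int × Int × Int)} {s x : Int × Int × Int}
    (h : x ∈ acc.2) : x ∈ (bfsStepB maze n m acc s).2 := by
  simp only [bfsStepB]
  split_ifs <;> simp_all [PySem.Set.mem_add]

lemma pvCands_straight {maze : List (List String)} {n m : Int} {x y d : Int}
    (h5 : 0 ≤ x + PySem.List.pyGetD pvDX d 0 ∧ x + PySem.List.pyGetD pvDX d 0 < n ∧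
      0 ≤ y + PySem.List.pyGetD pvDY d 0 ∧ y + PySem.List.pyGetD pvDY d 0 < m ∧
      PySem.List.pyGetD (PySem.List.pyGetD maze (x + PySem.List.pyGetD pvDX d 0) [])
        (y + PySem.List.pyGetD pvDY d 0) "" ≠ "X") :
    (x + PySem.List.pyGetD pvDX d 0, y + PySem.List.pyGetD pvDY d 0, d) ∈
      pvCands maze n m (x, y, d) := by
  simp only [pvCands, List.mem_append]
  left
  rw [if_pos h5]
  exact List.mem_singleton.2 rfl

lemma pvCands_turn (maze : List (List String)) (n m : Int) (x y d : Int) :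
    (x, y, PySem.Int.mod (d + 1) 4) ∈ pvCands maze n m (x, y, d) := by
  simp only [pvCands, List.mem_append, List.mem_singleton]
  right
  trivial

lemma pvCands_elim {maze : List (List String)} {n m : Int} {x y d : Int} {t : Int × Int × Int}
    (h : t ∈ pvCands maze n m (x, y, d)) :
    ((0 ≤ x + PySem.List.pyGetD pvDX d 0 ∧ x + PySem.List.pyGetD pvDX d 0 < n ∧
      0 ≤ y + PySem.List.pyGetD pvDY d 0 ∧ y + PySem.List.pyGetD pvDY d 0 < m ∧
      PySem.List.pyGetD (PySem.List.pyGetD maze (x + PySem.List.pyGetD pvDX d 0) [])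
        (y + PySem.List.pyGetD pvDY d 0) "" ≠ "X") ∧
     t = (x + PySem.List.pyGetD pvDX d 0, y + PySem.List.pyGetD pvDY d 0, d)) ∨
    t = (x, y, PySem.Int.mod (d + 1) 4) := by
  simp only [pvCands, List.mem_append, List.mem_singleton] at h
  rcases h with h | h
  · split_ifs at h with h5
    · simp only [List.mem_singleton] at h
      exact Or.inl ⟨h5, h⟩
    · simp at h
  · exact Or.inr h

lemma pvStep_sub1 {maze : List (List String)} {n m : Int}
    {acc : List (Int × Int × Int) × PySem.Set (Int × Int × Int)} {s e : Int × Int × Int}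
    (h : e ∈ (bfsStepB maze n m acc s).1) :
    e ∈ acc.1 ∨ (e ∈ pvCands maze n m s ∧ ¬ e ∈ acc.2) := by
  obtain ⟨x, y, d⟩ := s
  simp only [bfsStepB] at h
  set nx := (x, y, d).1 + PySem.List.pyGetD pvDX (x, y, d).2.2 0 with hnx
  set ny := (x, y, d).2.1 + PySem.List.pyGetD pvDY (x, y, d).2.2 0 with hny
  set nd := PySem.Int.mod ((x, y, d).2.2 + 1) 4 with hnd
  by_cases hc : 0 ≤ nx ∧ nx < n ∧ 0 ≤ ny ∧ ny < m ∧
      PySem.List.pyGetD (PySem.List.pyGetD maze nx []) ny "" ≠ "X" ∧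
      ¬ PySem.Set.contains acc.2 (nx, ny, (x, y, d).2.2) = true
  · rw [if_pos hc] at h
    have h5 : 0 ≤ nx ∧ nx < n ∧ 0 ≤ ny ∧ ny < m ∧
        PySem.List.pyGetD (PySem.List.pyGetD maze nx []) ny "" ≠ "X" :=
      ⟨hc.1, hc.2.1, hc.2.2.1, hc.2.2.2.1, hc.2.2.2.2.1⟩
    have hfresh1 : (nx, ny, d) ∉ acc.2 :=
      fun hm => hc.2.2.2.2.2 ((PySem.Set.contains_iff _ _).2 hm)
    by_cases h2 : PySem.Set.contains (PySem.Set.add acc.2 (nx, ny, (x, y, d).2.2))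
        ((x, y, d).1, (x, y, d).2.1, nd) = true
    · rw [if_pos h2] at h
      rcases List.mem_append.1 h with h' | h'
      · exact Or.inl h'
      · simp only [List.mem_singleton] at h'
        subst h'
        exact Or.inr ⟨pvCands_straight h5, hfresh1⟩
    · rw [if_neg h2] at h
      rcases List.mem_append.1 h with h' | h'
      · rcases List.mem_append.1 h' with h'' | h''
        · exact Or.inl h''
        · simp only [List.mem_singleton] at h''
          subst h''
          exact Or.inr ⟨pvCands_straight h5, hfresh1⟩
      · simp only [List.mem_singleton] at h'
        subst h'
        have hfresh2 : ((x, y, d).1, (x, y, d).2.1, nd) ∉ acc.2 := by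
          intro hm
          exact h2 ((PySem.Set.contains_iff _ _).2 ((PySem.Set.mem_add _ _ _).2 (Or.inl hm)))
        exact Or.inr ⟨pvCands_turn maze n m x y d, hfresh2⟩
  · rw [if_neg hc] at h
    by_cases h2 : PySem.Set.contains acc.2 ((x, y, d).1, (x, y, d).2.1, nd) = true
    · rw [if_pos h2] at h
      exact Or.inl h
    · rw [if_neg h2] at h
      rcases List.mem_append.1 h with h' | h'
      · exact Or.inl h'
      · simp only [List.mem_singleton] at h'
        subst h'
        have hfresh2 : ((x, y, d).1, (x, y, d).2.1, nd) ∉ acc.2 :=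
          fun hm => h2 ((PySem.Set.contains_iff _ _).2 hm)
        exact Or.inr ⟨pvCands_turn maze n m x y d, hfresh2⟩

lemma pvStep_cands2 {maze : List (List String)} {n m : Int}
    {acc : List (Int × Int × Int) × PySem.Set (Int × Int × Int)} {s t : Int × Int × Int}
    (h : t ∈ pvCands maze n m s) : t ∈ (bfsStepB maze n m acc s).2 := by
  obtain ⟨x, y, d⟩ := s
  simp only [bfsStepB]
  set nx := (x, y, d).1 + PySem.List.pyGetD pvDX (x, y, d).2.2 0 with hnx
  set ny := (x, y, d).2.1 + PySem.List.pyGetD pvDY (x, y, d).2.2 0 with hny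
  set nd := PySem.Int.mod ((x, y, d).2.2 + 1) 4 with hnd
  rcases pvCands_elim h with ⟨h5, rfl⟩ | rfl
  · -- straight candidate (the open-cell condition h5 holds)
    by_cases hc : 0 ≤ nx ∧ nx < n ∧ 0 ≤ ny ∧ ny < m ∧
        PySem.List.pyGetD (PySem.List.pyGetD maze nx []) ny "" ≠ "X" ∧
        ¬ PySem.Set.contains acc.2 (nx, ny, (x, y, d).2.2) = true
    · rw [if_pos hc]
      have h1 : (nx, ny, d) ∈ PySem.Set.add acc.2 (nx, ny, (x, y, d).2.2) :=
        (PySem.Set.mem_add _ _ _).2 (Or.inr rfl)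
      by_cases h2 : PySem.Set.contains (PySem.Set.add acc.2 (nx, ny, (x, y, d).2.2))
          ((x, y, d).1, (x, y, d).2.1, nd) = true
      · rw [if_pos h2]; exact h1
      · rw [if_neg h2]
        exact (PySem.Set.mem_add _ _ _).2 (Or.inl h1)
    · rw [if_neg hc]
      have hmem : (nx, ny, d) ∈ acc.2 := by
        by_contra hnm
        exact hc ⟨h5.1, h5.2.1, h5.2.2.1, h5.2.2.2.1, h5.2.2.2.2,
          fun hcc => hnm ((PySem.Set.contains_iff _ _).1 hcc)⟩
      by_cases h2 : PySem.Set.contains acc.2 ((x, y, d).1, (x, y, d).2.1, nd) = true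
      · rw [if_pos h2]; exact hmem
      · rw [if_neg h2]
        exact (PySem.Set.mem_add _ _ _).2 (Or.inl hmem)
  · -- turn candidate: always present afterwards
    by_cases hc : 0 ≤ nx ∧ nx < n ∧ 0 ≤ ny ∧ ny < m ∧
        PySem.List.pyGetD (PySem.List.pyGetD maze nx []) ny "" ≠ "X" ∧
        ¬ PySem.Set.contains acc.2 (nx, ny, (x, y, d).2.2) = true
    · rw [if_pos hc]
      by_cases h2 : PySem.Set.contains (PySem.Set.add acc.2 (nx, ny, (x, y, d).2.2))
          ((x, y, d).1, (x, y, d).2.1, nd) = true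
      · rw [if_pos h2]
        exact (PySem.Set.contains_iff _ _).1 h2
      · rw [if_neg h2]
        exact (PySem.Set.mem_add _ _ _).2 (Or.inr rfl)
    · rw [if_neg hc]
      by_cases h2 : PySem.Set.contains acc.2 ((x, y, d).1, (x, y, d).2.1, nd) = true
      · rw [if_pos h2]
        exact (PySem.Set.contains_iff _ _).1 h2
      · rw [if_neg h2]
        exact (PySem.Set.mem_add _ _ _).2 (Or.inr rfl)

lemma pvStep_decomp2 {maze : List (List String)} {n m : Int}
    {acc : List (Int × Int × Int) × PySem.Set (Int × Int × Int)} {s x : Int × Int × Int}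
    (h : x ∈ (bfsStepB maze n m acc s).2) : x ∈ acc.2 ∨ x ∈ (bfsStepB maze n m acc s).1 := by
  obtain ⟨a, b, d⟩ := s
  simp only [bfsStepB] at h ⊢
  set nx := (a, b, d).1 + PySem.List.pyGetD pvDX (a, b, d).2.2 0 with hnx
  set ny := (a, b, d).2.1 + PySem.List.pyGetD pvDY (a, b, d).2.2 0 with hny
  set nd := PySem.Int.mod ((a, b, d).2.2 + 1) 4 with hnd
  by_cases hc : 0 ≤ nx ∧ nx < n ∧ 0 ≤ ny ∧ ny < m ∧
      PySem.List.pyGetD (PySem.List.pyGetD maze nx []) ny "" ≠ "X" ∧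
      ¬ PySem.Set.contains acc.2 (nx, ny, (a, b, d).2.2) = true
  · rw [if_pos hc] at h ⊢
    by_cases h2 : PySem.Set.contains (PySem.Set.add acc.2 (nx, ny, (a, b, d).2.2))
        ((a, b, d).1, (a, b, d).2.1, nd) = true
    · rw [if_pos h2] at h ⊢
      rcases (PySem.Set.mem_add _ _ _).1 h with h' | rfl
      · exact Or.inl h'
      · exact Or.inr (by simp)
    · rw [if_neg h2] at h ⊢
      rcases (PySem.Set.mem_add _ _ _).1 h with h' | rfl
      · rcases (PySem.Set.mem_add _ _ _).1 h' with h'' | rfl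
        · exact Or.inl h''
        · exact Or.inr (by simp)
      · exact Or.inr (by simp)
  · rw [if_neg hc] at h ⊢
    by_cases h2 : PySem.Set.contains acc.2 ((a, b, d).1, (a, b, d).2.1, nd) = true
    · rw [if_pos h2] at h ⊢
      exact Or.inl h
    · rw [if_neg h2] at h ⊢
      rcases (PySem.Set.mem_add _ _ _).1 h with h' | rfl
      · exact Or.inl h'
      · exact Or.inr (by simp)

lemma pvStep_sub12 {maze : List (List String)} {n m : Int}
    {acc : List (Int × Int × Int) × PySem.Set (Int × Int × Int)} {s : Int × Int × Int}
    (h : ∀ e ∈ acc.1, e ∈ acc.2) :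
    ∀ e ∈ (bfsStepB maze n m acc s).1, e ∈ (bfsStepB maze n m acc s).2 := by
  intro e he
  rcases pvStep_sub1 he with h' | ⟨hc, _⟩
  · exact pvStep_mem2 (h e h')
  · exact pvStep_cands2 hc

-- ---------- fold-level facts ----------

lemma pvFold_mem2 {maze : List (List String)} {n m : Int} :
    ∀ (l : List (Int × Int × Int)) (acc : List (Int × Int × Int) × PySem.Set (Int × Int × Int))
      (x : Int × Int × Int), x ∈ acc.2 → x ∈ (l.foldl (bfsStepB maze n m) acc).2 := by
  intro l
  induction l with
  | nil => intro acc x h; simpa using h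
  | cons s t ih => intro acc x h; exact ih _ x (pvStep_mem2 h)

lemma pvFold_mem1 {maze : List (List String)} {n m : Int} :
    ∀ (l : List (Int × Int × Int)) (acc : List (Int × Int × Int) × PySem.Set (Int × Int × Int))
      (x : Int × Int × Int), x ∈ acc.1 → x ∈ (l.foldl (bfsStepB maze n m) acc).1 := by
  intro l
  induction l with
  | nil => intro acc x h; simpa using h
  | cons s t ih => intro acc x h; exact ih _ x (pvStep_mem1 h)

lemma pvFold_new1 {maze : List (List String)} {n m : Int} :
    ∀ (l : List (Int × Int × Int)) (acc : List (Int × Int × Int) × PySem.Set (Int × Int × Int))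
      (e : Int × Int × Int), e ∈ (l.foldl (bfsStepB maze n m) acc).1 →
      e ∈ acc.1 ∨ ∃ p ∈ l, e ∈ pvCands maze n m p := by
  intro l
  induction l with
  | nil => intro acc e h; exact Or.inl (by simpa using h)
  | cons s t ih =>
    intro acc e h
    rcases ih _ e h with h' | ⟨p, hp, hc⟩
    · rcases pvStep_sub1 h' with h'' | ⟨hc, _⟩
      · exact Or.inl h''
      · exact Or.inr ⟨s, List.mem_cons_self .., hc⟩
    · exact Or.inr ⟨p, List.mem_cons_of_mem _ hp, hc⟩

lemma pvFold_sub12 {maze : List (List String)} {n m : Int} :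
    ∀ (l : List (Int × Int × Int)) (acc : List (Int × Int × Int) × PySem.Set (Int × Int × Int)),
      (∀ e ∈ acc.1, e ∈ acc.2) →
      ∀ e ∈ (l.foldl (bfsStepB maze n m) acc).1, e ∈ (l.foldl (bfsStepB maze n m) acc).2 := by
  intro l
  induction l with
  | nil => intro acc h; simpa using h
  | cons s t ih => intro acc h; exact ih _ (pvStep_sub12 h)

lemma pvFold_decomp2 {maze : List (List String)} {n m : Int} :
    ∀ (l : List (Int × Int × Int)) (acc : List (Int × Int × Int) × PySem.Set (Int × Int × Int))
      (x : Int × Int × Int), x ∈ (l.foldl (bfsStepB maze n m) acc).2 →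
      x ∈ acc.2 ∨ x ∈ (l.foldl (bfsStepB maze n m) acc).1 := by
  intro l
  induction l with
  | nil => intro acc x h; exact Or.inl (by simpa using h)
  | cons s t ih =>
    intro acc x h
    rcases ih _ x h with h' | h'
    · rcases pvStep_decomp2 h' with h'' | h''
      · exact Or.inl h''
      · exact Or.inr (pvFold_mem1 t _ x h'')
    · exact Or.inr h'

lemma pvFold_fresh {maze : List (List String)} {n m : Int}
    (seen0 : PySem.Set (Int × Int × Int)) :
    ∀ (l : List (Int × Int × Int)) (acc : List (Int × Int × Int) × PySem.Set (Int × Int × Int)),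
      (∀ x ∈ seen0, x ∈ acc.2) → (∀ e ∈ acc.1, ¬ e ∈ seen0) →
      ∀ e ∈ (l.foldl (bfsStepB maze n m) acc).1, ¬ e ∈ seen0 := by
  intro l
  induction l with
  | nil => intro acc _ h2; simpa using h2
  | cons s t ih =>
    intro acc h1 h2
    refine ih _ (fun x hx => pvStep_mem2 (h1 x hx)) ?_
    intro e he
    rcases pvStep_sub1 he with h' | ⟨_, hnm⟩
    · exact h2 e h'
    · exact fun hm => hnm (h1 e hm)

lemma pvFold_cands2 {maze : List (List String)} {n m : Int} :
    ∀ (l : List (Int × Int × Int)) (acc : List (Int × Int × Int) × PySem.Set (Int × Int × Int))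
      (p t : Int × Int × Int), p ∈ l → t ∈ pvCands maze n m p →
      t ∈ (l.foldl (bfsStepB maze n m) acc).2 := by
  intro l
  induction l with
  | nil => intro acc p t h; simp at h
  | cons s r ih =>
    intro acc p t hp hc
    rcases List.mem_cons.1 hp with rfl | hp'
    · exact pvFold_mem2 r _ t (pvStep_cands2 hc)
    · exact ih _ p t hp' hc

-- ---------- generation-level facts ----------

lemma pvGen_F_sub_S (maze : List (List String)) (start : Int × Int) (n m : Int) :
    ∀ k, ∀ e ∈ (pvGen maze start n m k).1, e ∈ (pvGen maze start n m k).2 := by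
  intro k
  cases k with
  | zero => intro e he; simpa [pvGen, PySem.Set.mem_ofList] using he
  | succ k =>
    intro e he
    exact pvFold_sub12 _ _ (by simp) e he

lemma pvGen_S_mono (maze : List (List String)) (start : Int × Int) (n m : Int) :
    ∀ k k', k ≤ k' → ∀ x ∈ (pvGen maze start n m k).2, x ∈ (pvGen maze start n m k').2 := by
  intro k k' hk
  induction k' with
  | zero => intro x hx; have : k = 0 := by omega
            subst this; exact hx
  | succ k' ih =>
    intro x hx
    rcases Nat.lt_or_ge k (k' + 1) with h | h
    · have := ih (by omega) x hx
      exact pvFold_mem2 _ _ x this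
    · have : k = k' + 1 := by omega
      subst this; exact hx

lemma pvGen_fresh (maze : List (List String)) (start : Int × Int) (n m : Int) :
    ∀ k, ∀ e ∈ (pvGen maze start n m (k + 1)).1, ¬ e ∈ (pvGen maze start n m k).2 := by
  intro k e he
  simp only [pvGen] at he
  exact pvFold_fresh (pvGen maze start n m k).2 (pvGen maze start n m k).1
    ([], (pvGen maze start n m k).2) (fun x hx => hx) (by simp) e he

lemma pvGen_S_mem (maze : List (List String)) (start : Int × Int) (n m : Int) :
    ∀ k, ∀ x ∈ (pvGen maze start n m k).2, ∃ j, j ≤ k ∧ x ∈ (pvGen maze start n m j).1 := by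
  intro k
  induction k with
  | zero => intro x hx; exact ⟨0, le_refl _, by simpa [pvGen, PySem.Set.mem_ofList] using hx⟩
  | succ k ih =>
    intro x hx
    rcases pvFold_decomp2 _ _ x hx with h | h
    · obtain ⟨j, hj, hx'⟩ := ih x h
      exact ⟨j, by omega, hx'⟩
    · exact ⟨k + 1, le_refl _, h⟩

lemma pvGen_cands (maze : List (List String)) (start : Int × Int) (n m : Int) :
    ∀ k p t, p ∈ (pvGen maze start n m k).1 → t ∈ pvCands maze n m p →
      t ∈ (pvGen maze start n m (k + 1)).2 := by
  intro k p t hp hc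
  exact pvFold_cands2 _ _ p t hp hc

lemma pvGen_origin (maze : List (List String)) (start : Int × Int) (n m : Int) :
    ∀ k e, e ∈ (pvGen maze start n m (k + 1)).1 →
      ∃ p ∈ (pvGen maze start n m k).1, e ∈ pvCands maze n m p := by
  intro k e he
  rcases pvFold_new1 _ _ e he with h | h
  · simp at h
  · exact h

lemma pvGen_unique (maze : List (List String)) (start : Int × Int) (n m : Int) :
    ∀ i j e, e ∈ (pvGen maze start n m i).1 → e ∈ (pvGen maze start n m j).1 → i = j := by
  have key : ∀ i j e, i < j → e ∈ (pvGen maze start n m i).1 →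
      e ∈ (pvGen maze start n m j).1 → False := by
    intro i j e hij hi hj
    obtain ⟨j', rfl⟩ : ∃ j', j = j' + 1 := ⟨j - 1, by omega⟩
    have h1 : e ∈ (pvGen maze start n m i).2 := pvGen_F_sub_S maze start n m i e hi
    have h2 : e ∈ (pvGen maze start n m j').2 :=
      pvGen_S_mono maze start n m i j' (by omega) e h1
    exact pvGen_fresh maze start n m j' e hj h2
  intro i j e hi hj
  rcases Nat.lt_trichotomy i j with h | h | h
  · exact absurd (key i j e h hi hj) (by simp)
  · exact h
  · exact absurd (key j i e h hj hi) (by simp)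

lemma pvGen_absorb (maze : List (List String)) (start : Int × Int) (n m : Int) :
    ∀ g j, (pvGen maze start n m g).1 = [] → g ≤ j →
      (pvGen maze start n m j).1 = [] ∧ (pvGen maze start n m j).2 = (pvGen maze start n m g).2 := by
  intro g j hg hgj
  induction j with
  | zero => have : g = 0 := by omega
            subst this; exact ⟨hg, rfl⟩
  | succ j ih =>
    rcases Nat.lt_or_ge g (j + 1) with h | h
    · obtain ⟨h1, h2⟩ := ih (by omega)
      constructor
      · simp [pvGen, h1]
      · simp [pvGen, h1, h2]
    · have : g = j + 1 := by omega
      subst this; exact ⟨hg, rfl⟩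

lemma pvF0_nodup (start : Int × Int) : (pvF0 start).Nodup := by
  norm_num [pvF0, List.nodup_cons, List.mem_cons, Prod.mk.injEq]

lemma pvGen_card (maze : List (List String)) (start : Int × Int) (n m : Int) :
    ∀ k, (pvGen maze start n m k).1 ≠ [] →
      k + 4 ≤ ((pvGen maze start n m k).2 : List (Int × Int × Int)).toFinset.card := by
  intro k
  induction k with
  | zero =>
    intro _
    have hnd := pvF0_nodup start
    have hset : ((pvGen maze start n m 0).2 : List (Int × Int × Int)) = pvF0 start := by
      simp only [pvGen]
      exact PySem.Set.ofList_eq_self_of_nodup _ hnd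
    rw [hset, List.toFinset_card_of_nodup hnd]
    simp [pvF0]
  | succ k ih =>
    intro hne
    have hkne : (pvGen maze start n m k).1 ≠ [] := by
      intro h0
      exact hne (by simp [pvGen, h0])
    have hk := ih hkne
    rcases hF : (pvGen maze start n m (k + 1)).1 with _ | ⟨h, tl⟩
    · exact absurd hF hne
    have hh : h ∈ (pvGen maze start n m (k + 1)).1 := by
      rw [hF]; exact List.mem_cons_self ..
    have hin : h ∈ (pvGen maze start n m (k + 1)).2 :=
      pvGen_F_sub_S maze start n m (k + 1) h hh
    have hnotin : h ∉ (pvGen maze start n m k).2 := pvGen_fresh maze start n m k h hh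
    have hsub : insert h ((pvGen maze start n m k).2 : List (Int × Int × Int)).toFinset ⊆
        ((pvGen maze start n m (k + 1)).2 : List (Int × Int × Int)).toFinset := by
      intro z hz
      rcases Finset.mem_insert.1 hz with rfl | hz
      · exact List.mem_toFinset.2 hin
      · exact List.mem_toFinset.2
          (pvGen_S_mono maze start n m k (k + 1) (by omega) z (List.mem_toFinset.1 hz))
    have hcard := Finset.card_le_card hsub
    rw [Finset.card_insert_of_notMem (fun hm => hnotin (List.mem_toFinset.1 hm))] at hcard
    omega

-- Ok-invariance of the generations
lemma pvGen_ok (maze : List (List String)) (start : Int × Int) (n m : Int)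
    (Ok : (Int × Int × Int) → Prop)
    (hcands : ∀ s t, Ok s → t ∈ pvCands maze n m s → Ok t)
    (hOkF0 : ∀ s ∈ pvF0 start, Ok s) :
    ∀ k, (∀ e ∈ (pvGen maze start n m k).1, Ok e) ∧ (∀ x ∈ (pvGen maze start n m k).2, Ok x) := by
  intro k
  induction k with
  | zero =>
    refine ⟨fun e he => hOkF0 e (by simpa [pvGen] using he), fun x hx => ?_⟩
    exact hOkF0 x (by simpa [pvGen, PySem.Set.mem_ofList] using hx)
  | succ k ih =>
    have hF : ∀ e ∈ (pvGen maze start n m (k + 1)).1, Ok e := by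
      intro e he
      obtain ⟨p, hp, hc⟩ := pvGen_origin maze start n m k e he
      exact hcands p e (ih.1 p hp) hc
    refine ⟨hF, fun x hx => ?_⟩
    rcases pvFold_decomp2 _ _ x hx with h | h
    · exact ih.2 x h
    · exact hF x h

-- ---------- facts about B's relaxation ----------

def pvDictLe (d1 d2 : PySem.Dict (Int × Int × Int) Int) : Prop :=
  ∀ s v, d1.get? s = some v → ∃ w, w ≤ v ∧ d2.get? s = some w

lemma pvDictLe_refl (d : PySem.Dict (Int × Int × Int) Int) : pvDictLe d d :=
  fun s v h => ⟨v, le_refl _, h⟩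

lemma pvDictLe_trans {d1 d2 d3 : PySem.Dict (Int × Int × Int) Int}
    (h12 : pvDictLe d1 d2) (h23 : pvDictLe d2 d3) : pvDictLe d1 d3 := by
  intro s v h
  obtain ⟨w, hw, h2⟩ := h12 s v h
  obtain ⟨u, hu, h3⟩ := h23 s w h2
  exact ⟨u, by omega, h3⟩

lemma pvKey_none {dc : PySem.Dict (Int × Int × Int) Int × Bool} {t : Int × Int × Int} {w : Int}
    (hg : dc.1.get? t = none) : pvRelaxKey dc t w = (dc.1.insert t w, true) := by
  simp [pvRelaxKey, hg]

lemma pvKey_lt {dc : PySem.Dict (Int × Int × Int) Int × Bool} {t : Int × Int × Int} {w u : Int}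
    (hg : dc.1.get? t = some u) (hw : w < u) : pvRelaxKey dc t w = (dc.1.insert t w, true) := by
  simp [pvRelaxKey, hg, hw]

lemma pvKey_ge {dc : PySem.Dict (Int × Int × Int) Int × Bool} {t : Int × Int × Int} {w u : Int}
    (hg : dc.1.get? t = some u) (hw : ¬ w < u) : pvRelaxKey dc t w = dc := by
  simp [pvRelaxKey, hg, hw]

lemma pvKey_flag {dc : PySem.Dict (Int × Int × Int) Int × Bool} {t : Int × Int × Int} {w : Int}
    (h : dc.2 = true) : (pvRelaxKey dc t w).2 = true := by
  cases hg : dc.1.get? t with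
  | none => rw [pvKey_none hg]
  | some u =>
    by_cases hw : w < u
    · rw [pvKey_lt hg hw]
    · rw [pvKey_ge hg hw]; exact h

lemma pvKey_le (dc : PySem.Dict (Int × Int × Int) Int × Bool) (t : Int × Int × Int) (w : Int) :
    pvDictLe dc.1 (pvRelaxKey dc t w).1 := by
  cases hg : dc.1.get? t with
  | none =>
    rw [pvKey_none hg]
    intro s v hs
    by_cases hst : s = t
    · subst hst; rw [hg] at hs; cases hs
    · exact ⟨v, le_refl _, by exact (PySem.Dict.get?_insert_of_ne _ _ hst).trans hs⟩
  | some u =>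
    by_cases hw : w < u
    · rw [pvKey_lt hg hw]
      intro s v hs
      by_cases hst : s = t
      · have huv : u = v := by rw [hst, hg] at hs; simpa using hs
        refine ⟨w, by omega, ?_⟩
        rw [hst]
        exact PySem.Dict.get?_insert_self _ _ _
      · exact ⟨v, le_refl _, by exact (PySem.Dict.get?_insert_of_ne _ _ hst).trans hs⟩
    · rw [pvKey_ge hg hw]
      exact pvDictLe_refl _

lemma pvKey_bound (dc : PySem.Dict (Int × Int × Int) Int × Bool) (t : Int × Int × Int) (w : Int) :
    ∃ u, u ≤ w ∧ (pvRelaxKey dc t w).1.get? t = some u := by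
  cases hg : dc.1.get? t with
  | none =>
    rw [pvKey_none hg]
    exact ⟨w, le_refl _, PySem.Dict.get?_insert_self _ _ _⟩
  | some u =>
    by_cases hw : w < u
    · rw [pvKey_lt hg hw]
      exact ⟨w, le_refl _, PySem.Dict.get?_insert_self _ _ _⟩
    · rw [pvKey_ge hg hw]
      exact ⟨u, by omega, hg⟩

lemma pvKey_other {dc : PySem.Dict (Int × Int × Int) Int × Bool} {t t' : Int × Int × Int} {w : Int}
    (h : t' ≠ t) : (pvRelaxKey dc t w).1.get? t' = dc.1.get? t' := by
  cases hg : dc.1.get? t with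
  | none => rw [pvKey_none hg]; exact PySem.Dict.get?_insert_of_ne _ _ h
  | some u =>
    by_cases hw : w < u
    · rw [pvKey_lt hg hw]; exact PySem.Dict.get?_insert_of_ne _ _ h
    · rw [pvKey_ge hg hw]

lemma pvKey_nodup {dc : PySem.Dict (Int × Int × Int) Int × Bool} {t : Int × Int × Int} {w : Int}
    (h : dc.1.keys.Nodup) : (pvRelaxKey dc t w).1.keys.Nodup := by
  cases hg : dc.1.get? t with
  | none => rw [pvKey_none hg]; exact PySem.Dict.nodup_keys_insert _ _ _ h
  | some u =>
    by_cases hw : w < u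
    · rw [pvKey_lt hg hw]; exact PySem.Dict.nodup_keys_insert _ _ _ h
    · rw [pvKey_ge hg hw]; exact h

lemma pvKey_fix {dc : PySem.Dict (Int × Int × Int) Int × Bool} {t : Int × Int × Int} {w : Int}
    (h : (pvRelaxKey dc t w).2 = false) :
    pvRelaxKey dc t w = dc ∧ ∃ u, u ≤ w ∧ dc.1.get? t = some u := by
  cases hg : dc.1.get? t with
  | none => rw [pvKey_none hg] at h; simp at h
  | some u =>
    by_cases hw : w < u
    · rw [pvKey_lt hg hw] at h; simp at h
    · refine ⟨pvKey_ge hg hw, u, by omega, rfl⟩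

-- "every table entry is witnessed by a generation of at most its value"
def pvPb (maze : List (List String)) (start : Int × Int) (n m : Int)
    (T : PySem.Dict (Int × Int × Int) Int) : Prop :=
  ∀ s v, T.get? s = some v → ∃ i : Nat, (i : Int) ≤ v ∧ s ∈ (pvGen maze start n m i).1

-- "every state of a generation ≤ r is in the table with value at most its generation"
def pvQa (maze : List (List String)) (start : Int × Int) (n m : Int) (r : Nat)
    (T : PySem.Dict (Int × Int × Int) Int) : Prop :=
  ∀ i, i ≤ r → ∀ s ∈ (pvGen maze start n m i).1,
    ∃ v : Int, v ≤ (i : Int) ∧ T.get? s = some v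

lemma pvKey_Pb {maze : List (List String)} {start : Int × Int} {n m : Int}
    {dc : PySem.Dict (Int × Int × Int) Int × Bool} {t : Int × Int × Int} {w : Int}
    (hPb : pvPb maze start n m dc.1)
    (ht : ∃ j : Nat, (j : Int) ≤ w ∧ t ∈ (pvGen maze start n m j).1) :
    pvPb maze start n m (pvRelaxKey dc t w).1 := by
  have hins : pvPb maze start n m (dc.1.insert t w) := by
    intro s v hs
    by_cases hst : s = t
    · subst hst
      rw [PySem.Dict.get?_insert_self] at hs
      have hwv : w = v := by simpa using hs
      rw [← hwv]; exact ht
    · rw [PySem.Dict.get?_insert_of_ne _ _ hst] at hs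
      exact hPb s v hs
  cases hg : dc.1.get? t with
  | none => rw [pvKey_none hg]; exact hins
  | some u =>
    by_cases hw : w < u
    · rw [pvKey_lt hg hw]; exact hins
    · rw [pvKey_ge hg hw]; exact hPb

lemma pvRelax_flag {maze : List (List String)} {n m : Int}
    {acc : PySem.Dict (Int × Int × Int) Int × Bool} {it : (Int × Int × Int) × Int}
    (h : acc.2 = true) : (bfsRelax maze n m acc it).2 = true := by
  simp only [bfsRelax]
  split_ifs with hc
  · exact pvKey_flag (pvKey_flag h)
  · exact pvKey_flag h

lemma pvRelax_le (maze : List (List String)) (n m : Int)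
    (acc : PySem.Dict (Int × Int × Int) Int × Bool) (it : (Int × Int × Int) × Int) :
    pvDictLe acc.1 (bfsRelax maze n m acc it).1 := by
  simp only [bfsRelax]
  split_ifs with hc
  · exact pvDictLe_trans (pvKey_le acc _ _) (pvKey_le _ _ _)
  · exact pvKey_le acc _ _

lemma pvRelax_nodup {maze : List (List String)} {n m : Int}
    {acc : PySem.Dict (Int × Int × Int) Int × Bool} {it : (Int × Int × Int) × Int}
    (h : acc.1.keys.Nodup) : (bfsRelax maze n m acc it).1.keys.Nodup := by
  simp only [bfsRelax]
  split_ifs with hc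
  · exact pvKey_nodup (pvKey_nodup h)
  · exact pvKey_nodup h

-- the inserted keys of one bfsRelax are candidates of the item's state
lemma pvRelax_Pb {maze : List (List String)} {start : Int × Int} {n m : Int}
    {acc : PySem.Dict (Int × Int × Int) Int × Bool} {it : (Int × Int × Int) × Int}
    (hPb : pvPb maze start n m acc.1)
    (hit : ∃ i : Nat, (i : Int) ≤ it.2 ∧ it.1 ∈ (pvGen maze start n m i).1) :
    pvPb maze start n m (bfsRelax maze n m acc it).1 := by
  obtain ⟨i, hi, hmem⟩ := hit
  have hw : ∀ t, t ∈ pvCands maze n m it.1 →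
      ∃ j : Nat, (j : Int) ≤ it.2 + 1 ∧ t ∈ (pvGen maze start n m j).1 := by
    intro t hc
    obtain ⟨j, hj, hmemj⟩ := pvGen_S_mem maze start n m (i + 1) t
      (pvGen_cands maze start n m i it.1 t hmem hc)
    exact ⟨j, by push_cast; omega, hmemj⟩
  simp only [bfsRelax]
  split_ifs with hc
  · refine pvKey_Pb (pvKey_Pb hPb ?_) ?_
    · exact hw _ (pvCands_straight hc)
    · exact hw _ (pvCands_turn maze n m it.1.1 it.1.2.1 it.1.2.2)
  · exact pvKey_Pb hPb (hw _ (pvCands_turn maze n m it.1.1 it.1.2.1 it.1.2.2))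

-- after processing item (p, v), every candidate of p is in the table with value ≤ v+1
lemma pvRelax_bound {maze : List (List String)} {n m : Int}
    (acc : PySem.Dict (Int × Int × Int) Int × Bool) (it : (Int × Int × Int) × Int)
    {t : Int × Int × Int} (ht : t ∈ pvCands maze n m it.1) :
    ∃ w, w ≤ it.2 + 1 ∧ (bfsRelax maze n m acc it).1.get? t = some w := by
  simp only [bfsRelax]
  rcases pvCands_elim (show t ∈ pvCands maze n m (it.1.1, it.1.2.1, it.1.2.2) from ht)
    with ⟨h5, rfl⟩ | rfl
  · rw [if_pos h5]
    by_cases hcc : (it.1.1 + PySem.List.pyGetD pvDX it.1.2.2 0,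
        it.1.2.1 + PySem.List.pyGetD pvDY it.1.2.2 0, it.1.2.2) =
        (it.1.1, it.1.2.1, PySem.Int.mod (it.1.2.2 + 1) 4)
    · rw [hcc]
      exact pvKey_bound _ _ _
    · obtain ⟨u, hu, hgi⟩ := pvKey_bound acc
        (it.1.1 + PySem.List.pyGetD pvDX it.1.2.2 0,
         it.1.2.1 + PySem.List.pyGetD pvDY it.1.2.2 0, it.1.2.2) (it.2 + 1)
      refine ⟨u, hu, ?_⟩
      rw [pvKey_other hcc]
      exact hgi
  · exact pvKey_bound _ _ _

lemma pvRelax_fix {maze : List (List String)} {n m : Int}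
    {d : PySem.Dict (Int × Int × Int) Int} {it : (Int × Int × Int) × Int}
    (h : (bfsRelax maze n m (d, false) it).2 = false) :
    (bfsRelax maze n m (d, false) it).1 = d ∧
      ∀ t ∈ pvCands maze n m it.1, ∃ w, w ≤ it.2 + 1 ∧ d.get? t = some w := by
  simp only [bfsRelax] at h ⊢
  split_ifs at h ⊢ with hc
  · obtain ⟨houter, u2, hu2, hg2⟩ := pvKey_fix h
    have hflag1 : (pvRelaxKey (d, false)
        (it.1.1 + PySem.List.pyGetD pvDX it.1.2.2 0,
         it.1.2.1 + PySem.List.pyGetD pvDY it.1.2.2 0, it.1.2.2) (it.2 + 1)).2 = false := by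
      rw [houter] at h; exact h
    obtain ⟨hinner, u1, hu1, hg1⟩ := pvKey_fix hflag1
    constructor
    · rw [houter, hinner]
    · intro t htc
      rcases pvCands_elim (show t ∈ pvCands maze n m (it.1.1, it.1.2.1, it.1.2.2) from htc)
        with ⟨h5, rfl⟩ | rfl
      · exact ⟨u1, hu1, hg1⟩
      · rw [hinner] at hg2
        exact ⟨u2, hu2, hg2⟩
  · obtain ⟨houter, u2, hu2, hg2⟩ := pvKey_fix h
    constructor
    · rw [houter]
    · intro t htc
      rcases pvCands_elim (show t ∈ pvCands maze n m (it.1.1, it.1.2.1, it.1.2.2) from htc)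
        with ⟨h5, rfl⟩ | rfl
      · exact absurd h5 hc
      · exact ⟨u2, hu2, hg2⟩

-- fold-level: flag stays true
lemma pvFoldFlag {maze : List (List String)} {n m : Int} :
    ∀ (l : List ((Int × Int × Int) × Int)) (d : PySem.Dict (Int × Int × Int) Int),
      (l.foldl (bfsRelax maze n m) (d, true)).2 = true := by
  intro l
  induction l with
  | nil => intro d; rfl
  | cons it t ih =>
    intro d
    simp only [List.foldl_cons]
    rcases hr : bfsRelax maze n m (d, true) it with ⟨d', b⟩
    have h1 : b = true := by
      have h : (bfsRelax maze n m (d, true) it).2 = true :=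
        pvRelax_flag (maze := maze) (n := n) (m := m) (acc := (d, true)) (it := it) rfl
      rw [hr] at h; exact h
    subst h1
    exact ih d'


lemma pvFold_le (maze : List (List String)) (n m : Int) :
    ∀ (l : List ((Int × Int × Int) × Int)) (acc : PySem.Dict (Int × Int × Int) Int × Bool),
      pvDictLe acc.1 (l.foldl (bfsRelax maze n m) acc).1 := by
  intro l
  induction l with
  | nil => intro acc; exact pvDictLe_refl _
  | cons it t ih =>
    intro acc
    exact pvDictLe_trans (pvRelax_le maze n m acc it) (ih _)

lemma pvFold_nodupD {maze : List (List String)} {n m : Int} :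
    ∀ (l : List ((Int × Int × Int) × Int)) (acc : PySem.Dict (Int × Int × Int) Int × Bool),
      acc.1.keys.Nodup → (l.foldl (bfsRelax maze n m) acc).1.keys.Nodup := by
  intro l
  induction l with
  | nil => intro acc h; exact h
  | cons it t ih => intro acc h; exact ih _ (pvRelax_nodup h)

lemma pvFold_Pb {maze : List (List String)} {start : Int × Int} {n m : Int} :
    ∀ (l : List ((Int × Int × Int) × Int)) (acc : PySem.Dict (Int × Int × Int) Int × Bool),
      (∀ pv ∈ l, ∃ i : Nat, (i : Int) ≤ pv.2 ∧ pv.1 ∈ (pvGen maze start n m i).1) →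
      pvPb maze start n m acc.1 → pvPb maze start n m (l.foldl (bfsRelax maze n m) acc).1 := by
  intro l
  induction l with
  | nil => intro acc _ h; exact h
  | cons it t ih =>
    intro acc hl h
    exact ih _ (fun pv hpv => hl pv (List.mem_cons_of_mem _ hpv))
      (pvRelax_Pb h (hl it (List.mem_cons_self ..)))

lemma pvFold_bound {maze : List (List String)} {n m : Int} :
    ∀ (l : List ((Int × Int × Int) × Int)) (acc : PySem.Dict (Int × Int × Int) Int × Bool)
      (p : Int × Int × Int) (v : Int) (t : Int × Int × Int),
      (p, v) ∈ l → t ∈ pvCands maze n m p →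
      ∃ w, w ≤ v + 1 ∧ (l.foldl (bfsRelax maze n m) acc).1.get? t = some w := by
  intro l
  induction l with
  | nil => intro acc p v t h; simp at h
  | cons it r ih =>
    intro acc p v t hp hc
    rcases List.mem_cons.1 hp with rfl | hp'
    · obtain ⟨w, hw, hget⟩ := pvRelax_bound acc (p, v) hc
      obtain ⟨w', hw', hget'⟩ := pvFold_le maze n m r _ t w hget
      exact ⟨w', by omega, hget'⟩
    · exact ih _ p v t hp' hc

lemma pvFold_fix {maze : List (List String)} {n m : Int} :
    ∀ (l : List ((Int × Int × Int) × Int)) (d : PySem.Dict (Int × Int × Int) Int),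
      (l.foldl (bfsRelax maze n m) (d, false)).2 = false →
      (l.foldl (bfsRelax maze n m) (d, false)).1 = d ∧
        ∀ pv ∈ l, ∀ t ∈ pvCands maze n m pv.1, ∃ w, w ≤ pv.2 + 1 ∧ d.get? t = some w := by
  intro l
  induction l with
  | nil => intro d _; exact ⟨rfl, by simp⟩
  | cons it r ih =>
    intro d hflag
    simp only [List.foldl_cons] at hflag ⊢
    rcases hr : bfsRelax maze n m (d, false) it with ⟨d', b⟩
    rw [hr] at hflag
    cases b with
    | true => rw [pvFoldFlag] at hflag; simp at hflag
    | false =>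
      have h2' : (bfsRelax maze n m (d, false) it).2 = false := by rw [hr]
      obtain ⟨hd, hcond⟩ := pvRelax_fix h2'
      rw [hr] at hd
      simp only at hd
      subst hd
      obtain ⟨h1, h3⟩ := ih _ hflag
      refine ⟨h1, fun pv hpv t htc => ?_⟩
      rcases List.mem_cons.1 hpv with rfl | hpv'
      · exact hcond t htc
      · exact h3 pv hpv' t htc

-- items of a nodup dict satisfying pvPb are generation-witnessed
lemma pvItems_wit {maze : List (List String)} {start : Int × Int} {n m : Int}
    {d : PySem.Dict (Int × Int × Int) Int} (hnd : d.keys.Nodup) (hPb : pvPb maze start n m d) :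
    ∀ pv ∈ d.items, ∃ i : Nat, (i : Int) ≤ pv.2 ∧ pv.1 ∈ (pvGen maze start n m i).1 := by
  intro pv hpv
  exact hPb pv.1 pv.2 (PySem.Dict.get?_of_mem_items d (by simpa using hpv) hnd)

-- the main loop: Pb is preserved and Qa extends to every generation
lemma pvLoopMain (maze : List (List String)) (start : Int × Int) (n m : Int) :
    ∀ (R : Nat) (d : PySem.Dict (Int × Int × Int) Int) (r : Nat),
      d.keys.Nodup → pvPb maze start n m d → pvQa maze start n m r d →
      (∀ i, (pvGen maze start n m i).1 ≠ [] → i ≤ r + R) →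
      pvPb maze start n m (bfsBFLoop maze n m R d) ∧
        ∀ i, ∀ s ∈ (pvGen maze start n m i).1,
          ∃ v : Int, v ≤ (i : Int) ∧ (bfsBFLoop maze n m R d).get? s = some v := by
  intro R
  induction R with
  | zero =>
    intro d r hnd hPb hQa hbound
    refine ⟨hPb, ?_⟩
    intro i s hs
    by_cases hir : i ≤ r
    · exact hQa i hir s hs
    · exfalso
      have hne : (pvGen maze start n m i).1 ≠ [] := by
        intro h0; rw [h0] at hs; exact List.not_mem_nil hs
      have := hbound i hne
      omega
  | succ R ih =>
    intro d r hnd hPb hQa hbound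
    rcases hp : bfsRound maze n m d with ⟨d', b⟩
    have hgoal : bfsBFLoop maze n m (R + 1) d =
        (if b = true then bfsBFLoop maze n m R d' else d') := by
      simp [bfsBFLoop, hp]
    have hd1 : (d.items.foldl (bfsRelax maze n m) (d, false)).1 = d' := by
      have := congrArg Prod.fst hp
      simpa [bfsRound] using this
    cases b with
    | true =>
      rw [hgoal, if_pos rfl]
      apply ih d' (r + 1)
      · rw [← hd1]
        exact pvFold_nodupD d.items (d, false) hnd
      · rw [← hd1]
        exact pvFold_Pb d.items (d, false) (pvItems_wit hnd hPb) hPb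
      · -- Qa advances one generation per round
        intro i hir s hs
        rcases Nat.lt_or_ge i (r + 1) with hlt | hge
        · obtain ⟨v, hv, hget⟩ := hQa i (by omega) s hs
          obtain ⟨w, hw, hgw⟩ := pvFold_le maze n m d.items (d, false) s v hget
          rw [hd1] at hgw
          exact ⟨w, by omega, hgw⟩
        · have hieq : i = r + 1 := by omega
          subst hieq
          obtain ⟨p, hpmem, hcps⟩ := pvGen_origin maze start n m r s hs
          obtain ⟨v, hv, hget⟩ := hQa r (by omega) p hpmem
          have hmemit : (p, v) ∈ d.items := PySem.Dict.mem_items_of_get?_eq_some d hget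
          obtain ⟨w, hw, hgw⟩ := pvFold_bound d.items (d, false) p v s hmemit hcps
          rw [hd1] at hgw
          exact ⟨w, by push_cast; omega, hgw⟩
      · intro i hne
        have := hbound i hne
        omega
    | false =>
      rw [hgoal, if_neg (by simp)]
      have hflag : (d.items.foldl (bfsRelax maze n m) (d, false)).2 = false := by
        have := congrArg Prod.snd hp
        simpa [bfsRound] using this
      obtain ⟨hdd, hcond⟩ := pvFold_fix d.items d hflag
      have hd'd : d' = d := by rw [← hd1, hdd]
      subst hd'd
      refine ⟨hPb, ?_⟩
      intro i
      induction i with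
      | zero => exact fun s hs => hQa 0 (by omega) s hs
      | succ i ih2 =>
        intro s hs
        obtain ⟨p, hpmem, hcps⟩ := pvGen_origin maze start n m i s hs
        obtain ⟨v, hv, hget⟩ := ih2 p hpmem
        have hmemit : (p, v) ∈ d'.items := PySem.Dict.mem_items_of_get?_eq_some d' hget
        obtain ⟨w, hw, hgw⟩ := hcond (p, v) hmemit s hcps
        exact ⟨w, by push_cast; omega, hgw⟩

-- exact characterisation of the final table: value = generation index
lemma pvTchar (maze : List (List String)) (start : Int × Int) (n m : Int)
    (T : PySem.Dict (Int × Int × Int) Int)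
    (hPb : pvPb maze start n m T)
    (hQ : ∀ i, ∀ s ∈ (pvGen maze start n m i).1, ∃ v : Int, v ≤ (i : Int) ∧ T.get? s = some v) :
    ∀ s v, T.get? s = some v ↔ (0 ≤ v ∧ s ∈ (pvGen maze start n m v.toNat).1) := by
  intro s v
  constructor
  · intro h
    obtain ⟨i, hi, hmem⟩ := hPb s v h
    obtain ⟨v', hv', hget⟩ := hQ i s hmem
    rw [h] at hget
    have hvv : v = v' := by simpa using hget
    refine ⟨by omega, ?_⟩
    have hit : v.toNat = i := by omega
    rw [hit]; exact hmem
  · rintro ⟨hv, hmem⟩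
    obtain ⟨v', hv', hget⟩ := hQ v.toNat s hmem
    obtain ⟨j, hj, hmem'⟩ := hPb s v' hget
    have hju : j = v.toNat := pvGen_unique maze start n m j v.toNat s hmem' hmem
    have hvv : v' = v := by omega
    rw [← hvv]; exact hget

-- ---------- the initial table ----------

lemma pvInit_get (start : Int × Int) (s : Int × Int × Int) (v : Int) :
    ((PySem.List.pyRange 0 4 1).foldl
      (fun (dd : PySem.Dict (Int × Int × Int) Int) d => dd.insert (start.1, start.2, d) 0)
      PySem.Dict.empty).get? s = some v ↔ (s ∈ pvF0 start ∧ v = 0) := by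
  have hr : PySem.List.pyRange 0 4 1 = [0, 1, 2, 3] := by decide
  rw [hr]
  simp only [List.foldl_cons, List.foldl_nil]
  simp only [PySem.Dict.get?_insert, PySem.Dict.get?_empty, pvF0, List.mem_cons,
    List.not_mem_nil, or_false]
  split_ifs with h1 h2 h3 h4 <;> simp_all <;> tauto

lemma pvInit_nodup (start : Int × Int) :
    ((PySem.List.pyRange 0 4 1).foldl
      (fun (dd : PySem.Dict (Int × Int × Int) Int) d => dd.insert (start.1, start.2, d) 0)
      PySem.Dict.empty).keys.Nodup := by
  have hr : PySem.List.pyRange 0 4 1 = [0, 1, 2, 3] := by decide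
  rw [hr]
  simp only [List.foldl_cons, List.foldl_nil]
  exact PySem.Dict.nodup_keys_insert _ _ _ (PySem.Dict.nodup_keys_insert _ _ _
    (PySem.Dict.nodup_keys_insert _ _ _ (PySem.Dict.nodup_keys_insert _ _ _
      PySem.Dict.nodup_keys_empty)))

-- ---------- the best-of-four extraction ----------

lemma pvBestKeep (T : PySem.Dict (Int × Int × Int) Int) (e : Int × Int) :
    ∀ (l : List Int) (kv : Int), 0 ≤ kv →
      (∀ d ∈ l, ∀ v, T.get? (e.1, e.2, d) = some v → kv ≤ v) →
      l.foldl (bfsBestStep T e) kv = kv := by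
  intro l
  induction l with
  | nil => intro kv _ _; rfl
  | cons d t ih =>
    intro kv hkv hmin
    simp only [List.foldl_cons]
    have hstep : bfsBestStep T e kv d = kv := by
      cases hg : T.get? (e.1, e.2, d) with
      | none => simp [bfsBestStep, hg]
      | some v =>
        have h1 : kv ≤ v := hmin d (List.mem_cons_self ..) v hg
        have h2 : ¬ (kv = -1 ∨ v < kv) := by omega
        simp only [bfsBestStep, hg]
        rw [if_neg h2]
    rw [hstep]
    exact ih kv hkv (fun d' hd' => hmin d' (List.mem_cons_of_mem _ hd'))

lemma pvBestMin (T : PySem.Dict (Int × Int × Int) Int) (e : Int × Int) (kv : Int) :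
    ∀ (l : List Int) (b : Int), 0 ≤ kv →
      (∀ d ∈ l, ∀ v, T.get? (e.1, e.2, d) = some v → kv ≤ v) →
      (b = -1 ∨ kv ≤ b) →
      (∃ d₀ ∈ l, T.get? (e.1, e.2, d₀) = some kv) →
      l.foldl (bfsBestStep T e) b = kv := by
  intro l
  induction l with
  | nil => intro b _ _ _ h; simp at h
  | cons d t ih =>
    intro b hkv hmin hb ⟨d₀, hd₀, hget⟩
    simp only [List.foldl_cons]
    rcases List.mem_cons.1 hd₀ with rfl | hd₀'
    · -- the head attains kv
      have hstep : bfsBestStep T e b d₀ = kv := by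
        simp only [bfsBestStep, hget]
        rcases hb with rfl | hble
        · simp
        · by_cases hlt : kv < b
          · simp [hlt]
          · have hkb : kv = b := by omega
            subst hkb; simp
      rw [hstep]
      exact pvBestKeep T e t kv hkv (fun d' hd' => hmin d' (List.mem_cons_of_mem _ hd'))
    · -- d₀ is in the tail; the head can only keep b ≥ kv or lower it towards values ≥ kv
      have hb' : bfsBestStep T e b d = -1 ∨ kv ≤ bfsBestStep T e b d := by
        cases hg : T.get? (e.1, e.2, d) with
        | none =>
          have hs : bfsBestStep T e b d = b := by simp [bfsBestStep, hg]
          rw [hs]; exact hb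
        | some v =>
          have h1 : kv ≤ v := hmin d (List.mem_cons_self ..) v hg
          by_cases h2 : b = -1 ∨ v < b
          · have hs : bfsBestStep T e b d = v := by
              simp only [bfsBestStep, hg]; rw [if_pos h2]
            rw [hs]; right; exact h1
          · have hs : bfsBestStep T e b d = b := by
              simp only [bfsBestStep, hg]; rw [if_neg h2]
            rw [hs]
            rcases hb with rfl | hble
            · exact absurd (Or.inl rfl) h2
            · right; exact hble
      exact ih _ hkv (fun d' hd' => hmin d' (List.mem_cons_of_mem _ hd')) hb' ⟨d₀, hd₀', hget⟩

lemma pvBestNone (T : PySem.Dict (Int × Int × Int) Int) (e : Int × Int) :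
    ∀ (l : List Int) (b : Int), (∀ d ∈ l, T.get? (e.1, e.2, d) = none) →
      l.foldl (bfsBestStep T e) b = b := by
  intro l
  induction l with
  | nil => intro b _; rfl
  | cons d t ih =>
    intro b h
    simp only [List.foldl_cons]
    have hstep : bfsBestStep T e b d = b := by
      simp [bfsBestStep, h d (List.mem_cons_self ..)]
    rw [hstep]
    exact ih b (fun d' hd' => h d' (List.mem_cons_of_mem _ hd'))

-- hit test ↔ an end-state in the frontier
lemma pvHit_iff (end_ : Int × Int) (l : List (Int × Int × Int)) :
    (l.any (fun s => (s.1, s.2.1) == end_)) = true ↔ ∃ d, (end_.1, end_.2, d) ∈ l := by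
  rw [List.any_eq_true]
  constructor
  · rintro ⟨s, hs, hbeq⟩
    have : (s.1, s.2.1) = end_ := by simpa using hbeq
    refine ⟨s.2.2, ?_⟩
    have h1 : s.1 = end_.1 := by rw [← this]
    have h2 : s.2.1 = end_.2 := by rw [← this]
    have : (end_.1, end_.2, s.2.2) = s := by
      ext <;> simp [h1, h2]
    rw [this]; exact hs
  · rintro ⟨d, hd⟩
    exact ⟨(end_.1, end_.2, d), hd, by simp⟩

-- the generation loop returns exactly the best-of-four of the exact table
lemma pvLoopBChar (maze : List (List String)) (start : Int × Int) (end_ : Int × Int) (n m : Int)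
    (T : PySem.Dict (Int × Int × Int) Int)
    (hT : ∀ s v, T.get? s = some v ↔ (0 ≤ v ∧ s ∈ (pvGen maze start n m v.toNat).1))
    (hdir : ∀ k, ∀ s ∈ (pvGen maze start n m k).1, 0 ≤ s.2.2 ∧ s.2.2 < 4) :
    ∀ (fuel k : Nat) (r : Int),
      bfsLoopB maze end_ n m fuel (pvGen maze start n m k).1 (pvGen maze start n m k).2 (k : Int) = some r →
      (∀ j, j < k → ¬ ((pvGen maze start n m j).1.any (fun s => (s.1, s.2.1) == end_) = true)) →
      r = bfsBest T end_ := by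
  intro fuel
  induction fuel with
  | zero => intro k r h _; simp [bfsLoopB] at h
  | succ fuel ih =>
    intro k r h hnohit
    rcases hF : (pvGen maze start n m k).1 with _ | ⟨s0, tl⟩
    · -- the frontier is empty: the loop returns -1 and every lookup at end_ is none
      rw [hF] at h
      have hr : r = -1 := by simpa [bfsLoopB] using h.symm
      subst hr
      have hnone : ∀ dq ∈ PySem.List.pyRange 0 4 1, T.get? (end_.1, end_.2, dq) = none := by
        intro dq _
        cases hg : T.get? (end_.1, end_.2, dq) with
        | none => rfl
        | some v =>
          exfalso
          obtain ⟨hv, hmem⟩ := (hT _ _).1 hg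
          have hhit : ((pvGen maze start n m v.toNat).1.any
              (fun s => (s.1, s.2.1) == end_)) = true :=
            (pvHit_iff end_ _).2 ⟨dq, hmem⟩
          rcases Nat.lt_or_ge v.toNat k with hlt | hge
          · exact hnohit _ hlt hhit
          · have habs := (pvGen_absorb maze start n m k v.toNat hF hge).1
            rw [habs] at hmem
            exact List.not_mem_nil hmem
      exact (pvBestNone T end_ _ (-1) hnone).symm
    · rw [hF] at h
      by_cases hany : ((s0 :: tl).any (fun s => (s.1, s.2.1) == end_)) = true
      · -- the frontier contains the end cell: the loop returns k, and so does the table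
        have hr : r = (k : Int) := by
          simp only [bfsLoopB, if_pos hany] at h
          simpa using h.symm
        subst hr
        obtain ⟨dq, hdq⟩ : ∃ dq, (end_.1, end_.2, dq) ∈ (pvGen maze start n m k).1 := by
          rw [hF]; exact (pvHit_iff end_ _).1 hany
        have hd4 : 0 ≤ dq ∧ dq < 4 := by simpa using hdir k _ hdq
        have hget : T.get? (end_.1, end_.2, dq) = some (k : Int) := by
          apply (hT _ _).2
          refine ⟨by omega, ?_⟩
          simpa [Int.toNat_natCast] using hdq
        have hmin : ∀ dd ∈ PySem.List.pyRange 0 4 1, ∀ v,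
            T.get? (end_.1, end_.2, dd) = some v → (k : Int) ≤ v := by
          intro dd _ v hv
          obtain ⟨hv0, hmemv⟩ := (hT _ _).1 hv
          by_contra hlt
          have hvk : v.toNat < k := by omega
          exact hnohit _ hvk ((pvHit_iff end_ _).2 ⟨dd, hmemv⟩)
        have hdmem : dq ∈ PySem.List.pyRange 0 4 1 := by
          have hd : dq = 0 ∨ dq = 1 ∨ dq = 2 ∨ dq = 3 := by
            have := hd4
            omega
          have hr4 : PySem.List.pyRange 0 4 1 = [0, 1, 2, 3] := by decide
          rw [hr4]
          rcases hd with rfl | rfl | rfl | rfl <;> simp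
        exact (pvBestMin T end_ (k : Int) _ (-1) (by omega) hmin (Or.inl rfl)
          ⟨dq, hdmem, hget⟩).symm
      · -- no hit: step to generation k+1
        simp only [bfsLoopB] at h
        rw [if_neg hany] at h
        have hfold1 : ((s0 :: tl).foldl (bfsStepB maze n m) ([], (pvGen maze start n m k).2)) =
            pvGen maze start n m (k + 1) := by
          simp [pvGen, hF]
        have hcast : (k : Int) + 1 = ((k + 1 : Nat) : Int) := by push_cast; ring
        rw [hfold1, hcast] at h
        refine ih (k + 1) r h ?_
        intro j hj
        rcases Nat.lt_or_ge j k with hlt | hge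
        · exact hnohit j hlt
        · have hjk : j = k := by omega
          subst hjk
          rw [hF]
          exact hany

-- ---------- assembly ----------

lemma pvCapBound (n m : Int) : n.toNat * (m.toNat * 4) ≤ (4 * n * m + 4).toNat := by
  by_cases h : 0 < n ∧ 0 < m
  · obtain ⟨hn, hm⟩ := h
    have h1 : ((n.toNat : Int)) = n := Int.toNat_of_nonneg (by omega)
    have h2 : ((m.toNat : Int)) = m := Int.toNat_of_nonneg (by omega)
    have h3 : 4 * n * m + 4 = ((4 * n.toNat * m.toNat + 4 : Nat) : Int) := by
      push_cast
      rw [h1, h2]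
    rw [h3, Int.toNat_natCast]
    have he : n.toNat * (m.toNat * 4) = 4 * n.toNat * m.toNat := by ring
    omega
  · have : n.toNat = 0 ∨ m.toNat = 0 := by omega
    rcases this with h0 | h0 <;> simp [h0]

-- the generic assembly: any admissible space of bounded cardinality gives the equality
lemma pvAssemble (maze : List (List String)) (start end_ : Int × Int) (n m : Int)
    (S : Finset (Int × Int × Int)) (Ok : (Int × Int × Int) → Prop)
    (hOkS : ∀ s, Ok s → s ∈ S)
    (hstr : ∀ x y d, Ok (x, y, d) →
      (0 ≤ x + PySem.List.pyGetD pvDX d 0 ∧ x + PySem.List.pyGetD pvDX d 0 < n ∧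
       0 ≤ y + PySem.List.pyGetD pvDY d 0 ∧ y + PySem.List.pyGetD pvDY d 0 < m) →
      Ok (x + PySem.List.pyGetD pvDX d 0, y + PySem.List.pyGetD pvDY d 0, d))
    (htrn : ∀ x y d, Ok (x, y, d) → Ok (x, y, PySem.Int.mod (d + 1) 4))
    (hdirOk : ∀ s, Ok s → 0 ≤ s.2.2 ∧ s.2.2 < 4)
    (hOkF0 : ∀ s ∈ pvF0 start, Ok s)
    (hcardA : S.card ≤ maze.length * (m.toNat * 4) + 4)
    (hcardB : S.card ≤ (4 * n * m + 4).toNat + 4) :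
    bfs maze start end_ n m = bfs_alt maze start end_ n m := by
  -- Ok is closed under candidate expansion
  have hcands : ∀ s t, Ok s → t ∈ pvCands maze n m s → Ok t := by
    intro s t hOk hc
    obtain ⟨x, y, d⟩ := s
    rcases pvCands_elim hc with ⟨h5, rfl⟩ | rfl
    · exact hstr x y d hOk ⟨h5.1, h5.2.1, h5.2.2.1, h5.2.2.2.1⟩
    · exact htrn x y d hOk
  have hOkGen := pvGen_ok maze start n m Ok hcands hOkF0
  have hdir : ∀ k, ∀ s ∈ (pvGen maze start n m k).1, 0 ≤ s.2.2 ∧ s.2.2 < 4 :=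
    fun k s hs => hdirOk s ((hOkGen k).1 s hs)
  -- the number of rounds B runs suffices: generations die out within the state space
  set CAP := (4 * n * m + 4).toNat with hCAP
  have hbound : ∀ i, (pvGen maze start n m i).1 ≠ [] → i ≤ 0 + CAP := by
    intro i hne
    have hcard := pvGen_card maze start n m i hne
    have hsubS : ((pvGen maze start n m i).2 : List (Int × Int × Int)).toFinset ⊆ S := by
      intro z hz
      exact hOkS z ((hOkGen i).2 z (List.mem_toFinset.1 hz))
    have hle := Finset.card_le_card hsubS
    have hCB : S.card ≤ CAP + 4 := by rw [hCAP]; exact hcardB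
    omega
  -- B's initial table
  set init := (PySem.List.pyRange 0 4 1).foldl
      (fun (dd : PySem.Dict (Int × Int × Int) Int) d => dd.insert (start.1, start.2, d) 0)
      PySem.Dict.empty with hinit
  have hPb0 : pvPb maze start n m init := by
    intro s v hget
    obtain ⟨hmem, rfl⟩ := (pvInit_get start s v).1 hget
    exact ⟨0, by omega, by simpa [pvGen] using hmem⟩
  have hQa0 : pvQa maze start n m 0 init := by
    intro i hi s hs
    have hieq : i = 0 := by omega
    subst hieq
    have hmem : s ∈ pvF0 start := by simpa [pvGen] using hs
    exact ⟨0, by omega, (pvInit_get start s 0).2 ⟨hmem, rfl⟩⟩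
  obtain ⟨hPbT, hQT⟩ :=
    pvLoopMain maze start n m CAP init 0 (pvInit_nodup start) hPb0 hQa0 hbound
  have hT := pvTchar maze start n m _ hPbT hQT
  -- A's side: the queue loop equals the generation loop
  have hrange : PySem.List.pyRange 0 4 1 = [0, 1, 2, 3] := by decide
  set F0 := pvF0 start with hF0
  have hseenB : PySem.Set.ofList F0 = F0 :=
    PySem.Set.ofList_eq_self_of_nodup F0 (pvF0_nodup start)
  have hinitA : ((PySem.List.pyRange 0 4 1).foldl
      (fun (qv : List (Int × Int × Int × Int) × PySem.Set (Int × Int × Int)) d =>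
        (qv.1 ++ [(start.1, start.2, d, (0 : Int))], PySem.Set.add qv.2 (start.1, start.2, d)))
      ([], PySem.Set.empty)) = (pvTag 0 F0, F0) := by
    simp [hrange, PySem.Set.add_eq_ite, PySem.Set.empty, pvTag, Prod.mk.injEq, hF0, pvF0]
  set FUEL := 8 * ((maze.length + 1) * (m.toNat + 1) + 1) + 9 with hFUEL
  have hsub : ∀ s : PySem.Set (Int × Int × Int), (S \ s.toFinset).card ≤ S.card :=
    fun s => Finset.card_le_card Finset.sdiff_subset
  have hexp : (maze.length + 1) * (m.toNat + 1) =
      maze.length * m.toNat + maze.length + m.toNat + 1 := by ring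
  have hexp2 : maze.length * (m.toNat * 4) = 4 * (maze.length * m.toNat) := by ring
  have hφ : pvPhi S (pvTag 0 F0) F0 ≤ FUEL := by
    have h1 := hsub F0
    simp only [pvPhi, pvTag, hF0, pvF0, List.map_cons, List.map_nil, List.length_cons,
      List.length_nil]
    simp only [hF0, pvF0] at h1
    omega
  have hψ : pvPsi S F0 ≤ FUEL := by
    have h1 := hsub F0
    simp only [pvPsi]
    omega
  have hInvF0 : ∀ s ∈ F0, Ok s := hOkF0
  have hInvTag : ∀ e ∈ pvTag 0 F0, Ok (e.1, e.2.1, e.2.2.1) := by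
    intro e he
    simp only [pvTag, List.mem_map] at he
    obtain ⟨s, hs, rfl⟩ := he
    exact hInvF0 s hs
  have hA := pvAdqA maze end_ n m S Ok hOkS hstr htrn FUEL (pvTag 0 F0) F0 hInvTag hφ
  have hB := pvAdqB maze end_ n m S Ok hOkS hstr htrn FUEL F0 F0 0 hInvF0 hψ
  obtain ⟨r, hr⟩ := Option.isSome_iff_exists.1 hA
  obtain ⟨r', hr'⟩ := Option.isSome_iff_exists.1 hB
  have heq : r = r' := pvMainAB maze end_ n m FUEL F0 F0 0 FUEL r r' hr hr'
  have hbfs : bfs maze start end_ n m = r := by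
    simp only [bfs, hinitA]
    rw [← hFUEL, hr]
  -- the generation loop returns the best-of-four of B's final table
  have hchar : r' = bfsBest (bfsBFLoop maze n m CAP init) end_ := by
    apply pvLoopBChar maze start end_ n m _ hT hdir FUEL 0 r'
    · have hg1 : (pvGen maze start n m 0).1 = F0 := by simp [pvGen, hF0]
      have hg2 : (pvGen maze start n m 0).2 = F0 := by
        simp only [pvGen]
        exact hseenB
      rw [hg1, hg2, Nat.cast_zero]
      exact hr'
    · intro j hj
      exact absurd hj (Nat.not_lt_zero j)
  have hbfsalt : bfs_alt maze start end_ n m = bfsBest (bfsBFLoop maze n m CAP init) end_ := rfl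
  rw [hbfs, heq, hchar, hbfsalt]

-- ===== VERDICT (by name: the statement is the Claim_ definition above) =====
theorem bfs_spec : Claim_equal_bfs := by
  intro maze start end_ n m _ hPre
  unfold Spec_bfs
  have hOkF0 : ∀ s ∈ pvF0 start, pvOkSt start n m s := by
    intro s hs
    simp only [pvF0, List.mem_cons, List.not_mem_nil, or_false] at hs
    rcases hs with rfl | rfl | rfl | rfl <;> exact ⟨Or.inr rfl, by norm_num⟩
  have hbase := pvSpace_card_le start n m
  have hcap := pvCapBound n m
  rcases hPre with hn0 | hm0 | ⟨hshape, _⟩ | hstuck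
  · -- n ≤ 0 : the grid part of the space is empty
    refine pvAssemble maze start end_ n m (pvSpace start n m) (pvOkSt start n m)
      (fun s h => pvOkSt_mem_space h) (pvOk_str start n m) (pvOk_trn start n m)
      (fun s h => h.2) hOkF0 ?_ ?_
    · have h0 : n.toNat = 0 := Int.toNat_of_nonpos hn0
      rw [h0] at hbase
      simp only [Nat.zero_mul] at hbase
      omega
    · omega
  · -- m ≤ 0 : likewise
    refine pvAssemble maze start end_ n m (pvSpace start n m) (pvOkSt start n m)
      (fun s h => pvOkSt_mem_space h) (pvOk_str start n m) (pvOk_trn start n m)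
      (fun s h => h.2) hOkF0 ?_ ?_
    · have h0 : m.toNat = 0 := Int.toNat_of_nonpos hm0
      rw [h0] at hbase
      simp only [Nat.zero_mul, Nat.mul_zero] at hbase
      omega
    · omega
  · -- the maze really has the declared shape
    refine pvAssemble maze start end_ n m (pvSpace start n m) (pvOkSt start n m)
      (fun s h => pvOkSt_mem_space h) (pvOk_str start n m) (pvOk_trn start n m)
      (fun s h => h.2) hOkF0 ?_ ?_
    · have hn : n.toNat ≤ maze.length := Int.toNat_le.2 hshape
      have := Nat.mul_le_mul_right (m.toNat * 4) hn
      omega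
    · omega
  · -- stuck start: the search never leaves the four start states
    obtain ⟨h1, h2, h3, h4⟩ := hstuck
    refine pvAssemble maze start end_ n m
      (({start.1} : Finset Int) ×ˢ ({start.2} : Finset Int) ×ˢ ({0, 1, 2, 3} : Finset Int))
      (fun s => (s.1 = start.1 ∧ s.2.1 = start.2) ∧ 0 ≤ s.2.2 ∧ s.2.2 < 4)
      ?_ ?_ ?_ ?_ ?_ ?_ ?_
    · intro s hs
      obtain ⟨⟨hx, hy⟩, hd0, hd4⟩ := hs
      simp only [Finset.mem_product, Finset.mem_singleton, Finset.mem_insert,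
        Finset.mem_singleton]
      refine ⟨hx, hy, by omega⟩
    · intro x y d hOk hb
      exfalso
      obtain ⟨⟨hx, hy⟩, hd0, hd4⟩ := hOk
      dsimp only at hx hy hd0 hd4
      subst hx; subst hy
      have hd : d = 0 ∨ d = 1 ∨ d = 2 ∨ d = 3 := by omega
      rcases hd with rfl | rfl | rfl | rfl
      · refine absurd ?_ h1
        simp only [show PySem.List.pyGetD pvDX 0 0 = 1 from by decide,
          show PySem.List.pyGetD pvDY 0 0 = 0 from by decide] at hb
        exact ⟨by omega, by omega, by omega, by omega⟩
      · refine absurd ?_ h2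
        simp only [show PySem.List.pyGetD pvDX 1 0 = 0 from by decide,
          show PySem.List.pyGetD pvDY 1 0 = 1 from by decide] at hb
        exact ⟨by omega, by omega, by omega, by omega⟩
      · refine absurd ?_ h3
        simp only [show PySem.List.pyGetD pvDX 2 0 = -1 from by decide,
          show PySem.List.pyGetD pvDY 2 0 = 0 from by decide] at hb
        exact ⟨by omega, by omega, by omega, by omega⟩
      · refine absurd ?_ h4
        simp only [show PySem.List.pyGetD pvDX 3 0 = 0 from by decide,
          show PySem.List.pyGetD pvDY 3 0 = -1 from by decide] at hb
        exact ⟨by omega, by omega, by omega, by omega⟩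
    · intro x y d hOk
      exact ⟨hOk.1, pvNd_ok d⟩
    · intro s hs
      exact hs.2
    · intro s hs
      simp only [pvF0, List.mem_cons, List.not_mem_nil, or_false] at hs
      rcases hs with rfl | rfl | rfl | rfl <;> exact ⟨⟨rfl, rfl⟩, by norm_num⟩
    · have hc4 : (({start.1} : Finset Int) ×ˢ ({start.2} : Finset Int) ×ˢ
          ({0, 1, 2, 3} : Finset Int)).card = 4 := by
        simp
      omega
    · have hc4 : (({start.1} : Finset Int) ×ˢ ({start.2} : Finset Int) ×ˢ
          ({0, 1, 2, 3} : Finset Int)).card = 4 := by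
        simp
      omega
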